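/-
  GENERATED by c/gen_labels.py from the tables of the image gif (FUNCTIONS LOOPS CHECKS insns sym; the PROGRAM only (the base is in the shared library))
  -- do not edit; re-run the script when the image is rebuilt.

  `Gif.L.<function>.<label>`: a name for every code address of the image that a statement or a proof cites.
  Statements and proofs cite these names, never the numbers: a rebuild that only shifts code changes this file alone.
  Per function: entry, size (bytes), insns (instructions), cut<k> (the addresses the units table cites: segment
  entries, exits, cut points), loop<k> (loop heads), ret<k> (the return address of the k-th call), chk<k> (the call
  instruction of the k-th check site). One address may have several names.
-/
import X86.Derived.User.State
namespace Gif.L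
open X86

abbrev prog_main.entry : Word := 0x105000  -- gif_driver.c:246 ?
abbrev prog_main.size : Nat := 164  -- bytes of code: 0x105000 .. 0x1050a4
abbrev prog_main.insns : Nat := 37  -- instructions
abbrev prog_main.ret1 : Word := 0x105057  -- after the call at 0x105052 of gif_decode | gif_driver.c:253 ?
abbrev prog_main.ret2 : Word := 0x105076  -- after the call at 0x105071 of memcpy | gif_driver.c:257 ?

abbrev DGifGetPrefixChar.entry : Word := 0x105160  -- dgif_lib.c:1012 ?
abbrev DGifGetPrefixChar.size : Nat := 85  -- bytes of code: 0x105160 .. 0x1051b5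
abbrev DGifGetPrefixChar.insns : Nat := 30  -- instructions
abbrev DGifGetPrefixChar.loop1 : Word := 0x105177  -- loop head: cmp eax,r12d | dgif_lib.c:1015 ?
abbrev DGifGetPrefixChar.ret1 : Word := 0x10519d  -- after the call at 0x105198 of __asan_load4_noabort | dgif_lib.c:1019 ?
abbrev DGifGetPrefixChar.chk1 : Word := 0x105198  -- call __asan_load4_noabort; then mov eax,DWORD PTR [r13+0x0] | dgif_lib.c:1019 ?

abbrev digest_byte.entry : Word := 0x105240  -- gif_driver.c:90 ?
abbrev digest_byte.size : Nat := 22  -- bytes of code: 0x105240 .. 0x105256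
abbrev digest_byte.insns : Nat := 5  -- instructions

abbrev digest_int.entry : Word := 0x1052e0  -- gif_driver.c:95 ?
abbrev digest_int.size : Nat := 49  -- bytes of code: 0x1052e0 .. 0x105311
abbrev digest_int.insns : Nat := 17  -- instructions
abbrev digest_int.ret1 : Word := 0x1052e8  -- after the call at 0x1052e3 of digest_byte | gif_driver.c:97 ?
abbrev digest_int.ret2 : Word := 0x1052f5  -- after the call at 0x1052f0 of digest_byte | gif_driver.c:98 ?
abbrev digest_int.ret3 : Word := 0x105302  -- after the call at 0x1052fd of digest_byte | gif_driver.c:99 ?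
abbrev digest_int.ret4 : Word := 0x10530f  -- after the call at 0x10530a of digest_byte | gif_driver.c:100 ?

abbrev digest_bytes.entry : Word := 0x1053a0  -- gif_driver.c:105 ?
abbrev digest_bytes.size : Nat := 73  -- bytes of code: 0x1053a0 .. 0x1053e9
abbrev digest_bytes.insns : Nat := 27  -- instructions
abbrev digest_bytes.loop1 : Word := 0x1053d8  -- loop head: cmp r12,r13 | gif_driver.c:107 ?
abbrev digest_bytes.ret1 : Word := 0x1053c5  -- after the call at 0x1053c0 of __asan_load1_noabort | gif_driver.c:108 ?
abbrev digest_bytes.ret2 : Word := 0x1053d1  -- after the call at 0x1053cc of digest_byte | gif_driver.c:108 ?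
abbrev digest_bytes.chk1 : Word := 0x1053c0  -- call __asan_load1_noabort; then movzx esi,BYTE PTR [rbp+0x0] | gif_driver.c:108 ?

abbrev digest_map.entry : Word := 0x105480  -- gif_driver.c:113 ?
abbrev digest_map.size : Nat := 228  -- bytes of code: 0x105480 .. 0x105564
abbrev digest_map.insns : Nat := 67  -- instructions
abbrev digest_map.loop1 : Word := 0x105553  -- loop head: cmp r14d,r12d | gif_driver.c:121 ?
abbrev digest_map.ret1 : Word := 0x10549b  -- after the call at 0x105496 of __asan_load4_noabort | gif_driver.c:118 ?
abbrev digest_map.ret2 : Word := 0x1054aa  -- after the call at 0x1054a5 of digest_int | gif_driver.c:118 ?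
abbrev digest_map.ret3 : Word := 0x1054b6  -- after the call at 0x1054b1 of __asan_load4_noabort | gif_driver.c:119 ?
abbrev digest_map.ret4 : Word := 0x1054c2  -- after the call at 0x1054bd of digest_int | gif_driver.c:119 ?
abbrev digest_map.ret5 : Word := 0x1054ce  -- after the call at 0x1054c9 of __asan_load1_noabort | gif_driver.c:120 ?
abbrev digest_map.ret6 : Word := 0x1054db  -- after the call at 0x1054d6 of digest_int | gif_driver.c:120 ?
abbrev digest_map.ret7 : Word := 0x1054f0  -- after the call at 0x1054eb of digest_int | gif_driver.c:116 ?
abbrev digest_map.ret8 : Word := 0x1054fe  -- after the call at 0x1054f9 of __asan_load8_noabort | gif_driver.c:122 ?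
abbrev digest_map.ret9 : Word := 0x105511  -- after the call at 0x10550c of __asan_load1_noabort | gif_driver.c:122 ?
abbrev digest_map.ret10 : Word := 0x10551c  -- after the call at 0x105517 of digest_byte | gif_driver.c:122 ?
abbrev digest_map.ret11 : Word := 0x105528  -- after the call at 0x105523 of __asan_load1_noabort | gif_driver.c:123 ?
abbrev digest_map.ret12 : Word := 0x105534  -- after the call at 0x10552f of digest_byte | gif_driver.c:123 ?
abbrev digest_map.ret13 : Word := 0x105540  -- after the call at 0x10553b of __asan_load1_noabort | gif_driver.c:124 ?
abbrev digest_map.ret14 : Word := 0x10554c  -- after the call at 0x105547 of digest_byte | gif_driver.c:124 ?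
abbrev digest_map.chk1 : Word := 0x105496  -- call __asan_load4_noabort; then mov r14d,DWORD PTR [r13+0x0] | gif_driver.c:118 ?
abbrev digest_map.chk2 : Word := 0x1054b1  -- call __asan_load4_noabort; then mov esi,DWORD PTR [r13+0x4] | gif_driver.c:119 ?
abbrev digest_map.chk3 : Word := 0x1054c9  -- call __asan_load1_noabort; then movzx esi,BYTE PTR [r13+0x8] | gif_driver.c:120 ?
abbrev digest_map.chk4 : Word := 0x1054f9  -- call __asan_load8_noabort; then movsxd rax,r12d | gif_driver.c:122 ?
abbrev digest_map.chk5 : Word := 0x10550c  -- call __asan_load1_noabort; then movzx esi,BYTE PTR [rbx] | gif_driver.c:122 ?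
abbrev digest_map.chk6 : Word := 0x105523  -- call __asan_load1_noabort; then movzx esi,BYTE PTR [rbx+0x1] | gif_driver.c:123 ?
abbrev digest_map.chk7 : Word := 0x10553b  -- call __asan_load1_noabort; then movzx esi,BYTE PTR [rbx+0x2] | gif_driver.c:124 ?

abbrev digest_extensions.entry : Word := 0x105660  -- gif_driver.c:130 ?
abbrev digest_extensions.size : Nat := 162  -- bytes of code: 0x105660 .. 0x105702
abbrev digest_extensions.insns : Nat := 53  -- instructions
abbrev digest_extensions.loop1 : Word := 0x10568d  -- loop head: cmp r12d,r14d | gif_driver.c:136 ?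
abbrev digest_extensions.ret1 : Word := 0x105679  -- after the call at 0x105674 of digest_int | gif_driver.c:132 ?
abbrev digest_extensions.ret2 : Word := 0x1056a6  -- after the call at 0x1056a1 of __asan_load4_noabort | gif_driver.c:137 ?
abbrev digest_extensions.ret3 : Word := 0x1056b1  -- after the call at 0x1056ac of digest_int | gif_driver.c:137 ?
abbrev digest_extensions.ret4 : Word := 0x1056bc  -- after the call at 0x1056b7 of __asan_load4_noabort | gif_driver.c:138 ?
abbrev digest_extensions.ret5 : Word := 0x1056cb  -- after the call at 0x1056c6 of digest_int | gif_driver.c:138 ?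
abbrev digest_extensions.ret6 : Word := 0x1056d7  -- after the call at 0x1056d2 of __asan_load8_noabort | gif_driver.c:139 ?
abbrev digest_extensions.ret7 : Word := 0x1056eb  -- after the call at 0x1056e6 of digest_bytes | gif_driver.c:140 ?
abbrev digest_extensions.chk1 : Word := 0x1056a1  -- call __asan_load4_noabort; then mov esi,DWORD PTR [rbp+0x10] | gif_driver.c:137 ?
abbrev digest_extensions.chk2 : Word := 0x1056b7  -- call __asan_load4_noabort; then mov r13d,DWORD PTR [rbp+0x0] | gif_driver.c:138 ?
abbrev digest_extensions.chk3 : Word := 0x1056d2  -- call __asan_load8_noabort; then mov rsi,QWORD PTR [rbp+0x8] | gif_driver.c:139 ?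

abbrev digest_file.entry : Word := 0x1057c0  -- gif_driver.c:147 ?
abbrev digest_file.size : Nat := 590  -- bytes of code: 0x1057c0 .. 0x105a0e
abbrev digest_file.insns : Nat := 146  -- instructions
abbrev digest_file.loop1 : Word := 0x1059af  -- loop head: cmp DWORD PTR [rsp+0xc],r13d | gif_driver.c:158 ?
abbrev digest_file.ret1 : Word := 0x1057db  -- after the call at 0x1057d6 of __asan_load4_noabort | gif_driver.c:151 ?
abbrev digest_file.ret2 : Word := 0x1057ee  -- after the call at 0x1057e9 of digest_int | gif_driver.c:151 ?
abbrev digest_file.ret3 : Word := 0x1057fb  -- after the call at 0x1057f6 of __asan_load4_noabort | gif_driver.c:152 ?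
abbrev digest_file.ret4 : Word := 0x105808  -- after the call at 0x105803 of digest_int | gif_driver.c:152 ?
abbrev digest_file.ret5 : Word := 0x105815  -- after the call at 0x105810 of __asan_load4_noabort | gif_driver.c:153 ?
abbrev digest_file.ret6 : Word := 0x105822  -- after the call at 0x10581d of digest_int | gif_driver.c:153 ?
abbrev digest_file.ret7 : Word := 0x10582f  -- after the call at 0x10582a of __asan_load4_noabort | gif_driver.c:154 ?
abbrev digest_file.ret8 : Word := 0x10583c  -- after the call at 0x105837 of digest_int | gif_driver.c:154 ?
abbrev digest_file.ret9 : Word := 0x105849  -- after the call at 0x105844 of __asan_load1_noabort | gif_driver.c:155 ?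
abbrev digest_file.ret10 : Word := 0x105857  -- after the call at 0x105852 of digest_int | gif_driver.c:155 ?
abbrev digest_file.ret11 : Word := 0x105864  -- after the call at 0x10585f of __asan_load8_noabort | gif_driver.c:156 ?
abbrev digest_file.ret12 : Word := 0x105871  -- after the call at 0x10586c of digest_map | gif_driver.c:156 ?
abbrev digest_file.ret13 : Word := 0x10587e  -- after the call at 0x105879 of __asan_load4_noabort | gif_driver.c:157 ?
abbrev digest_file.ret14 : Word := 0x105891  -- after the call at 0x10588c of digest_int | gif_driver.c:157 ?
abbrev digest_file.ret15 : Word := 0x1058b3  -- after the call at 0x1058ae of __asan_load8_noabort | gif_driver.c:159 ?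
abbrev digest_file.ret16 : Word := 0x1058d3  -- after the call at 0x1058ce of __asan_load4_noabort | gif_driver.c:161 ?
abbrev digest_file.ret17 : Word := 0x1058e3  -- after the call at 0x1058de of __asan_load4_noabort | gif_driver.c:161 ?
abbrev digest_file.ret18 : Word := 0x1058f6  -- after the call at 0x1058f1 of __asan_load4_noabort | gif_driver.c:162 ?
abbrev digest_file.ret19 : Word := 0x105901  -- after the call at 0x1058fc of digest_int | gif_driver.c:162 ?
abbrev digest_file.ret20 : Word := 0x10590e  -- after the call at 0x105909 of __asan_load4_noabort | gif_driver.c:163 ?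
abbrev digest_file.ret21 : Word := 0x10591a  -- after the call at 0x105915 of digest_int | gif_driver.c:163 ?
abbrev digest_file.ret22 : Word := 0x105925  -- after the call at 0x105920 of digest_int | gif_driver.c:164 ?
abbrev digest_file.ret23 : Word := 0x105930  -- after the call at 0x10592b of digest_int | gif_driver.c:165 ?
abbrev digest_file.ret24 : Word := 0x10593c  -- after the call at 0x105937 of __asan_load1_noabort | gif_driver.c:166 ?
abbrev digest_file.ret25 : Word := 0x105948  -- after the call at 0x105943 of digest_int | gif_driver.c:166 ?
abbrev digest_file.ret26 : Word := 0x105954  -- after the call at 0x10594f of __asan_load8_noabort | gif_driver.c:167 ?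
abbrev digest_file.ret27 : Word := 0x105960  -- after the call at 0x10595b of digest_map | gif_driver.c:167 ?
abbrev digest_file.ret28 : Word := 0x10596c  -- after the call at 0x105967 of __asan_load8_noabort | gif_driver.c:168 ?
abbrev digest_file.ret29 : Word := 0x10597b  -- after the call at 0x105976 of digest_bytes | gif_driver.c:168 ?
abbrev digest_file.ret30 : Word := 0x105987  -- after the call at 0x105982 of __asan_load8_noabort | gif_driver.c:169 ?
abbrev digest_file.ret31 : Word := 0x105994  -- after the call at 0x10598f of __asan_load4_noabort | gif_driver.c:169 ?
abbrev digest_file.ret32 : Word := 0x1059a2  -- after the call at 0x10599d of digest_extensions | gif_driver.c:169 ?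
abbrev digest_file.ret33 : Word := 0x1059c4  -- after the call at 0x1059bf of __asan_load8_noabort | gif_driver.c:172 ?
abbrev digest_file.ret34 : Word := 0x1059d3  -- after the call at 0x1059ce of __asan_load4_noabort | gif_driver.c:172 ?
abbrev digest_file.ret35 : Word := 0x1059e4  -- after the call at 0x1059df of digest_extensions | gif_driver.c:172 ?
abbrev digest_file.ret36 : Word := 0x1059f4  -- after the call at 0x1059ef of __asan_store8_noabort | gif_driver.c:173 ?
abbrev digest_file.chk1 : Word := 0x1057d6  -- call __asan_load4_noabort; then mov esi,DWORD PTR [r12] | gif_driver.c:151 ?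
abbrev digest_file.chk2 : Word := 0x1057f6  -- call __asan_load4_noabort; then mov esi,DWORD PTR [r12+0x4] | gif_driver.c:152 ?
abbrev digest_file.chk3 : Word := 0x105810  -- call __asan_load4_noabort; then mov esi,DWORD PTR [r12+0x8] | gif_driver.c:153 ?
abbrev digest_file.chk4 : Word := 0x10582a  -- call __asan_load4_noabort; then mov esi,DWORD PTR [r12+0xc] | gif_driver.c:154 ?
abbrev digest_file.chk5 : Word := 0x105844  -- call __asan_load1_noabort; then movzx esi,BYTE PTR [r12+0x10] | gif_driver.c:155 ?
abbrev digest_file.chk6 : Word := 0x10585f  -- call __asan_load8_noabort; then mov rsi,QWORD PTR [r12+0x18] | gif_driver.c:156 ?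
abbrev digest_file.chk7 : Word := 0x105879  -- call __asan_load4_noabort; then mov eax,DWORD PTR [r12+0x20] | gif_driver.c:157 ?
abbrev digest_file.chk8 : Word := 0x1058ae  -- call __asan_load8_noabort; then movsxd rax,r13d | gif_driver.c:159 ?
abbrev digest_file.chk9 : Word := 0x1058ce  -- call __asan_load4_noabort; then mov r15d,DWORD PTR [rbx+0x8] | gif_driver.c:161 ?
abbrev digest_file.chk10 : Word := 0x1058de  -- call __asan_load4_noabort; then mov r14d,DWORD PTR [rbx+0xc] | gif_driver.c:161 ?
abbrev digest_file.chk11 : Word := 0x1058f1  -- call __asan_load4_noabort; then mov esi,DWORD PTR [rbx] | gif_driver.c:162 ?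
abbrev digest_file.chk12 : Word := 0x105909  -- call __asan_load4_noabort; then mov esi,DWORD PTR [rbx+0x4] | gif_driver.c:163 ?
abbrev digest_file.chk13 : Word := 0x105937  -- call __asan_load1_noabort; then movzx esi,BYTE PTR [rbx+0x10] | gif_driver.c:166 ?
abbrev digest_file.chk14 : Word := 0x10594f  -- call __asan_load8_noabort; then mov rsi,QWORD PTR [rbx+0x18] | gif_driver.c:167 ?
abbrev digest_file.chk15 : Word := 0x105967  -- call __asan_load8_noabort; then mov rsi,QWORD PTR [rbx+0x20] | gif_driver.c:168 ?
abbrev digest_file.chk16 : Word := 0x105982  -- call __asan_load8_noabort; then mov r14,QWORD PTR [rbx+0x30] | gif_driver.c:169 ?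
abbrev digest_file.chk17 : Word := 0x10598f  -- call __asan_load4_noabort; then mov esi,DWORD PTR [rbx+0x28] | gif_driver.c:169 ?
abbrev digest_file.chk18 : Word := 0x1059bf  -- call __asan_load8_noabort; then mov rbx,QWORD PTR [r12+0x58] | gif_driver.c:172 ?
abbrev digest_file.chk19 : Word := 0x1059ce  -- call __asan_load4_noabort; then mov esi,DWORD PTR [r12+0x50] | gif_driver.c:172 ?
abbrev digest_file.chk20 : Word := 0x1059ef  -- call __asan_store8_noabort; then mov rcx,QWORD PTR [rsp+0x10] | gif_driver.c:173 ?

abbrev mem_read.entry : Word := 0x105c60  -- gif_driver.c:42 ?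
abbrev mem_read.size : Nat := 131  -- bytes of code: 0x105c60 .. 0x105ce3
abbrev mem_read.insns : Nat := 44  -- instructions
abbrev mem_read.ret1 : Word := 0x105c7b  -- after the call at 0x105c76 of __asan_load8_noabort | gif_driver.c:43 ?
abbrev mem_read.ret2 : Word := 0x105c88  -- after the call at 0x105c83 of __asan_load8_noabort | gif_driver.c:44 ?
abbrev mem_read.ret3 : Word := 0x105c94  -- after the call at 0x105c8f of __asan_load8_noabort | gif_driver.c:44 ?
abbrev mem_read.ret4 : Word := 0x105cce  -- after the call at 0x105cc9 of memcpy | gif_driver.c:54 ?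
abbrev mem_read.ret5 : Word := 0x105cd6  -- after the call at 0x105cd1 of __asan_load8_noabort | gif_driver.c:55 ?
abbrev mem_read.chk1 : Word := 0x105c76  -- call __asan_load8_noabort; then mov rbp,QWORD PTR [rbp+0x68] | gif_driver.c:43 ?
abbrev mem_read.chk2 : Word := 0x105c83  -- call __asan_load8_noabort; then mov r12,QWORD PTR [rbp+0x8] | gif_driver.c:44 ?
abbrev mem_read.chk3 : Word := 0x105c8f  -- call __asan_load8_noabort; then mov rsi,QWORD PTR [rbp+0x0] | gif_driver.c:44 ?
abbrev mem_read.chk4 : Word := 0x105cd1  -- call __asan_load8_noabort; then add QWORD PTR [rbp+0x0],r12 | gif_driver.c:55 ?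

abbrev strncmp.entry : Word := 0x105d80  -- cextra.c:10 ?
abbrev strncmp.size : Nat := 120  -- bytes of code: 0x105d80 .. 0x105df8
abbrev strncmp.insns : Nat := 42  -- instructions
abbrev strncmp.loop1 : Word := 0x105dad  -- loop head: cmp rbx,r13 | cextra.c:12 ?
abbrev strncmp.ret1 : Word := 0x105dbe  -- after the call at 0x105db9 of __asan_load1_noabort | cextra.c:13 ?
abbrev strncmp.ret2 : Word := 0x105dce  -- after the call at 0x105dc9 of __asan_load1_noabort | cextra.c:14 ?
abbrev strncmp.chk1 : Word := 0x105db9  -- call __asan_load1_noabort; then movzx ebp,BYTE PTR [rbp+0x0] | cextra.c:13 ?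
abbrev strncmp.chk2 : Word := 0x105dc9  -- call __asan_load1_noabort; then movzx edx,BYTE PTR [r12] | cextra.c:14 ?

abbrev fread.entry : Word := 0x105e80  -- gif_stubs.c:18 ?
abbrev fread.size : Nat := 2  -- bytes of code: 0x105e80 .. 0x105e82
abbrev fread.insns : Nat := 1  -- instructions

abbrev InternalRead.entry : Word := 0x105f20  -- dgif_lib.c:33 ?
abbrev InternalRead.size : Nat := 111  -- bytes of code: 0x105f20 .. 0x105f8f
abbrev InternalRead.insns : Nat := 35  -- instructions
abbrev InternalRead.ret1 : Word := 0x105f3b  -- after the call at 0x105f36 of __asan_load8_noabort | dgif_lib.c:35 ?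
abbrev InternalRead.ret2 : Word := 0x105f49  -- after the call at 0x105f44 of __asan_load8_noabort | dgif_lib.c:35 ?
abbrev InternalRead.ret3 : Word := 0x105f5d  -- after the call at 0x105f5b of indirect: call rax | dgif_lib.c:36 ?
abbrev InternalRead.ret4 : Word := 0x105f72  -- after the call at 0x105f6d of __asan_load8_noabort | dgif_lib.c:37 ?
abbrev InternalRead.ret5 : Word := 0x105f7c  -- after the call at 0x105f77 of __asan_handle_no_return | dgif_lib.c:37 ?
abbrev InternalRead.ret6 : Word := 0x105f8f  -- after the call at 0x105f8a of fread (the call is the last instruction: nothing of this function fol…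
abbrev InternalRead.chk1 : Word := 0x105f36  -- call __asan_load8_noabort; then mov r12,QWORD PTR [rbx+0x70] | dgif_lib.c:35 ?
abbrev InternalRead.chk2 : Word := 0x105f44  -- call __asan_load8_noabort; then mov rax,QWORD PTR [r12+0x48] | dgif_lib.c:35 ?
abbrev InternalRead.chk3 : Word := 0x105f6d  -- call __asan_load8_noabort; then mov rbx,QWORD PTR [r12+0x40] | dgif_lib.c:37 ?

abbrev DGifGetWord.entry : Word := 0x106020  -- dgif_lib.c:740 ?
abbrev DGifGetWord.size : Nat := 162  -- bytes of code: 0x106020 .. 0x1060c2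
abbrev DGifGetWord.insns : Nat := 37  -- instructions
abbrev DGifGetWord.ret1 : Word := 0x106072  -- after the call at 0x10606d of InternalRead | dgif_lib.c:744 ?
abbrev DGifGetWord.ret2 : Word := 0x106080  -- after the call at 0x10607b of __asan_store4_noabort | dgif_lib.c:745 ?
abbrev DGifGetWord.ret3 : Word := 0x1060b7  -- after the call at 0x1060b2 of __asan_store4_noabort | dgif_lib.c:749 ?
abbrev DGifGetWord.chk1 : Word := 0x10607b  -- call __asan_store4_noabort; then mov DWORD PTR [rbp+0x60],0x66 | dgif_lib.c:745 ?
abbrev DGifGetWord.chk2 : Word := 0x1060b2  -- call __asan_store4_noabort; then mov DWORD PTR [r12],ebp | dgif_lib.c:749 ?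

abbrev DGifSetupDecompress.entry : Word := 0x106180  -- dgif_lib.c:813 ?
abbrev DGifSetupDecompress.size : Nat := 468  -- bytes of code: 0x106180 .. 0x106354
abbrev DGifSetupDecompress.insns : Nat := 102  -- instructions
abbrev DGifSetupDecompress.loop1 : Word := 0x10632d  -- loop head: cmp ebx,0xfff | dgif_lib.c:847 ?
abbrev DGifSetupDecompress.ret1 : Word := 0x1061d1  -- after the call at 0x1061cc of __asan_load8_noabort | dgif_lib.c:817 ?
abbrev DGifSetupDecompress.ret2 : Word := 0x1061e7  -- after the call at 0x1061e2 of InternalRead | dgif_lib.c:820 ?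
abbrev DGifSetupDecompress.ret3 : Word := 0x10620f  -- after the call at 0x10620a of __asan_store1_noabort | dgif_lib.c:834 ?
abbrev DGifSetupDecompress.ret4 : Word := 0x10621f  -- after the call at 0x10621a of __asan_store4_noabort | dgif_lib.c:835 ?
abbrev DGifSetupDecompress.ret5 : Word := 0x10623c  -- after the call at 0x106237 of __asan_store4_noabort | dgif_lib.c:836 ?
abbrev DGifSetupDecompress.ret6 : Word := 0x10624f  -- after the call at 0x10624a of __asan_store4_noabort | dgif_lib.c:837 ?
abbrev DGifSetupDecompress.ret7 : Word := 0x106261  -- after the call at 0x10625c of __asan_store4_noabort | dgif_lib.c:838 ?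
abbrev DGifSetupDecompress.ret8 : Word := 0x106273  -- after the call at 0x10626e of __asan_store4_noabort | dgif_lib.c:839 ?
abbrev DGifSetupDecompress.ret9 : Word := 0x106287  -- after the call at 0x106282 of __asan_store4_noabort | dgif_lib.c:840 ?
abbrev DGifSetupDecompress.ret10 : Word := 0x106296  -- after the call at 0x106291 of __asan_store4_noabort | dgif_lib.c:841 ?
abbrev DGifSetupDecompress.ret11 : Word := 0x1062a9  -- after the call at 0x1062a4 of __asan_store4_noabort | dgif_lib.c:842 ?
abbrev DGifSetupDecompress.ret12 : Word := 0x1062bc  -- after the call at 0x1062b7 of __asan_store4_noabort | dgif_lib.c:843 ?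
abbrev DGifSetupDecompress.ret13 : Word := 0x1062cf  -- after the call at 0x1062ca of __asan_store8_noabort | dgif_lib.c:844 ?
abbrev DGifSetupDecompress.ret14 : Word := 0x1062ef  -- after the call at 0x1062ea of __asan_store4_noabort | dgif_lib.c:822 ?
abbrev DGifSetupDecompress.ret15 : Word := 0x106306  -- after the call at 0x106301 of __asan_store4_noabort | dgif_lib.c:829 ?
abbrev DGifSetupDecompress.ret16 : Word := 0x106323  -- after the call at 0x10631e of __asan_store4_noabort | dgif_lib.c:848 ?
abbrev DGifSetupDecompress.chk1 : Word := 0x1061cc  -- call __asan_load8_noabort; then mov r12,QWORD PTR [rbx+0x70] | dgif_lib.c:817 ?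
abbrev DGifSetupDecompress.chk2 : Word := 0x10620a  -- call __asan_store1_noabort; then mov BYTE PTR [r12+0x58],0x0 | dgif_lib.c:834 ?
abbrev DGifSetupDecompress.chk3 : Word := 0x10621a  -- call __asan_store4_noabort; then mov DWORD PTR [r12+0x8],ebp | dgif_lib.c:835 ?
abbrev DGifSetupDecompress.chk4 : Word := 0x106237  -- call __asan_store4_noabort; then mov DWORD PTR [r12+0xc],ebx | dgif_lib.c:836 ?
abbrev DGifSetupDecompress.chk5 : Word := 0x10624a  -- call __asan_store4_noabort; then mov DWORD PTR [r12+0x10],r15d | dgif_lib.c:837 ?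
abbrev DGifSetupDecompress.chk6 : Word := 0x10625c  -- call __asan_store4_noabort; then mov DWORD PTR [r12+0x14],ebx | dgif_lib.c:838 ?
abbrev DGifSetupDecompress.chk7 : Word := 0x10626e  -- call __asan_store4_noabort; then mov DWORD PTR [r12+0x18],ebp | dgif_lib.c:839 ?
abbrev DGifSetupDecompress.chk8 : Word := 0x106282  -- call __asan_store4_noabort; then mov DWORD PTR [r12+0x1c],r14d | dgif_lib.c:840 ?
abbrev DGifSetupDecompress.chk9 : Word := 0x106291  -- call __asan_store4_noabort; then mov DWORD PTR [r12+0x28],0x0 | dgif_lib.c:841 ?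
abbrev DGifSetupDecompress.chk10 : Word := 0x1062a4  -- call __asan_store4_noabort; then mov DWORD PTR [r12+0x20],0x1002 | dgif_lib.c:842 ?
abbrev DGifSetupDecompress.chk11 : Word := 0x1062b7  -- call __asan_store4_noabort; then mov DWORD PTR [r12+0x2c],0x0 | dgif_lib.c:843 ?
abbrev DGifSetupDecompress.chk12 : Word := 0x1062ca  -- call __asan_store8_noabort; then mov QWORD PTR [r12+0x30],0x0 | dgif_lib.c:844 ?
abbrev DGifSetupDecompress.chk13 : Word := 0x1062ea  -- call __asan_store4_noabort; then mov DWORD PTR [rbx+0x60],0x66 | dgif_lib.c:822 ?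
abbrev DGifSetupDecompress.chk14 : Word := 0x106301  -- call __asan_store4_noabort; then mov DWORD PTR [rbx+0x60],0x66 | dgif_lib.c:829 ?
abbrev DGifSetupDecompress.chk15 : Word := 0x10631e  -- call __asan_store4_noabort; then mov DWORD PTR [rbp+0x0],0x1002 | dgif_lib.c:848 ?

abbrev DGifBufferedInput.entry : Word := 0x106540  -- dgif_lib.c:1119 ?
abbrev DGifBufferedInput.size : Nat := 294  -- bytes of code: 0x106540 .. 0x106666
abbrev DGifBufferedInput.insns : Nat := 84  -- instructions
abbrev DGifBufferedInput.ret1 : Word := 0x106559  -- after the call at 0x106554 of __asan_load1_noabort | dgif_lib.c:1120 ?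
abbrev DGifBufferedInput.ret2 : Word := 0x106567  -- after the call at 0x106562 of __asan_load1_noabort | dgif_lib.c:1143 ?
abbrev DGifBufferedInput.ret3 : Word := 0x106580  -- after the call at 0x10657b of __asan_load1_noabort | dgif_lib.c:1143 ?
abbrev DGifBufferedInput.ret4 : Word := 0x10658c  -- after the call at 0x106587 of __asan_store1_noabort | dgif_lib.c:1143 ?
abbrev DGifBufferedInput.ret5 : Word := 0x1065b8  -- after the call at 0x1065b3 of InternalRead | dgif_lib.c:1123 ?
abbrev DGifBufferedInput.ret6 : Word := 0x1065c8  -- after the call at 0x1065c3 of __asan_store4_noabort | dgif_lib.c:1124 ?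
abbrev DGifBufferedInput.ret7 : Word := 0x1065df  -- after the call at 0x1065da of __asan_load1_noabort | dgif_lib.c:1131 ?
abbrev DGifBufferedInput.ret8 : Word := 0x1065ef  -- after the call at 0x1065ea of __asan_store4_noabort | dgif_lib.c:1132 ?
abbrev DGifBufferedInput.ret9 : Word := 0x10660d  -- after the call at 0x106608 of InternalRead | dgif_lib.c:1135 ?
abbrev DGifBufferedInput.ret10 : Word := 0x106618  -- after the call at 0x106613 of __asan_load1_noabort | dgif_lib.c:1135 ?
abbrev DGifBufferedInput.ret11 : Word := 0x106629  -- after the call at 0x106624 of __asan_store4_noabort | dgif_lib.c:1136 ?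
abbrev DGifBufferedInput.ret12 : Word := 0x106644  -- after the call at 0x10663f of __asan_load1_noabort | dgif_lib.c:1139 ?
abbrev DGifBufferedInput.ret13 : Word := 0x106651  -- after the call at 0x10664c of __asan_store1_noabort | dgif_lib.c:1139 ?
abbrev DGifBufferedInput.chk1 : Word := 0x106554  -- call __asan_load1_noabort; then cmp BYTE PTR [rbx],0x0 | dgif_lib.c:1120 ?
abbrev DGifBufferedInput.chk2 : Word := 0x106562  -- call __asan_load1_noabort; then movzx ebp,BYTE PTR [rbx+0x1] | dgif_lib.c:1143 ?
abbrev DGifBufferedInput.chk3 : Word := 0x10657b  -- call __asan_load1_noabort; then movzx ebp,BYTE PTR [rbp+0x0] | dgif_lib.c:1143 ?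
abbrev DGifBufferedInput.chk4 : Word := 0x106587  -- call __asan_store1_noabort; then mov BYTE PTR [r12],bpl | dgif_lib.c:1143 ?
abbrev DGifBufferedInput.chk5 : Word := 0x1065c3  -- call __asan_store4_noabort; then mov DWORD PTR [r13+0x60],0x66 | dgif_lib.c:1124 ?
abbrev DGifBufferedInput.chk6 : Word := 0x1065da  -- call __asan_load1_noabort; then movzx edx,BYTE PTR [rbx] | dgif_lib.c:1131 ?
abbrev DGifBufferedInput.chk7 : Word := 0x1065ea  -- call __asan_store4_noabort; then mov DWORD PTR [r13+0x60],0x70 | dgif_lib.c:1132 ?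
abbrev DGifBufferedInput.chk8 : Word := 0x106613  -- call __asan_load1_noabort; then movzx eax,BYTE PTR [rbx] | dgif_lib.c:1135 ?
abbrev DGifBufferedInput.chk9 : Word := 0x106624  -- call __asan_store4_noabort; then mov DWORD PTR [r13+0x60],0x66 | dgif_lib.c:1136 ?
abbrev DGifBufferedInput.chk10 : Word := 0x10663f  -- call __asan_load1_noabort; then movzx r13d,BYTE PTR [rbx+0x1] | dgif_lib.c:1139 ?
abbrev DGifBufferedInput.chk11 : Word := 0x10664c  -- call __asan_store1_noabort; then mov BYTE PTR [r12],r13b | dgif_lib.c:1139 ?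

abbrev DGifDecompressInput.entry : Word := 0x1067a0  -- dgif_lib.c:1068 ?
abbrev DGifDecompressInput.size : Nat := 413  -- bytes of code: 0x1067a0 .. 0x10693d
abbrev DGifDecompressInput.insns : Nat := 105  -- instructions
abbrev DGifDecompressInput.loop1 : Word := 0x106807  -- loop head: lea rdi,[rbx+0x2c] | dgif_lib.c:1083 ?
abbrev DGifDecompressInput.ret1 : Word := 0x1067f4  -- after the call at 0x1067ef of __asan_load8_noabort | dgif_lib.c:1073 ?
abbrev DGifDecompressInput.ret2 : Word := 0x106801  -- after the call at 0x1067fc of __asan_load4_noabort | dgif_lib.c:1078 ?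
abbrev DGifDecompressInput.ret3 : Word := 0x106810  -- after the call at 0x10680b of __asan_load4_noabort | dgif_lib.c:1083 ?
abbrev DGifDecompressInput.ret4 : Word := 0x106829  -- after the call at 0x106824 of DGifBufferedInput | dgif_lib.c:1085 ?
abbrev DGifDecompressInput.ret5 : Word := 0x106836  -- after the call at 0x106831 of __asan_load8_noabort | dgif_lib.c:1089 ?
abbrev DGifDecompressInput.ret6 : Word := 0x106849  -- after the call at 0x106844 of __asan_load4_noabort | dgif_lib.c:1090 ?
abbrev DGifDecompressInput.ret7 : Word := 0x106867  -- after the call at 0x106862 of __asan_store4_noabort | dgif_lib.c:1079 ?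
abbrev DGifDecompressInput.ret8 : Word := 0x106897  -- after the call at 0x106892 of __asan_load8_noabort | dgif_lib.c:1093 ?
abbrev DGifDecompressInput.ret9 : Word := 0x1068ab  -- after the call at 0x1068a6 of __asan_load2_noabort | dgif_lib.c:1093 ?
abbrev DGifDecompressInput.ret10 : Word := 0x1068be  -- after the call at 0x1068b9 of __asan_store4_noabort | dgif_lib.c:1093 ?
abbrev DGifDecompressInput.ret11 : Word := 0x1068e2  -- after the call at 0x1068dd of __asan_load4_noabort | dgif_lib.c:1103 ?
abbrev DGifDecompressInput.ret12 : Word := 0x1068fd  -- after the call at 0x1068f8 of __asan_load4_noabort | dgif_lib.c:1104 ?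
abbrev DGifDecompressInput.chk1 : Word := 0x1067ef  -- call __asan_load8_noabort; then mov rbx,QWORD PTR [r13+0x70] | dgif_lib.c:1073 ?
abbrev DGifDecompressInput.chk2 : Word := 0x1067fc  -- call __asan_load4_noabort; then cmp DWORD PTR [rbx+0x18],0xc | dgif_lib.c:1078 ?
abbrev DGifDecompressInput.chk3 : Word := 0x10680b  -- call __asan_load4_noabort; then mov ebp,DWORD PTR [rbx+0x18] | dgif_lib.c:1083 ?
abbrev DGifDecompressInput.chk4 : Word := 0x106831  -- call __asan_load8_noabort; then mov rbp,QWORD PTR [rbx+0x30] | dgif_lib.c:1089 ?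
abbrev DGifDecompressInput.chk5 : Word := 0x106844  -- call __asan_load4_noabort; then mov ecx,DWORD PTR [rbx+0x2c] | dgif_lib.c:1090 ?
abbrev DGifDecompressInput.chk6 : Word := 0x106862  -- call __asan_store4_noabort; then mov DWORD PTR [r13+0x60],0x70 | dgif_lib.c:1079 ?
abbrev DGifDecompressInput.chk7 : Word := 0x106892  -- call __asan_load8_noabort; then mov r12,QWORD PTR [rbx+0x30] | dgif_lib.c:1093 ?
abbrev DGifDecompressInput.chk8 : Word := 0x1068a6  -- call __asan_load2_noabort; then movzx ebp,WORD PTR [rbp+rbp*1+0x141380] | dgif_lib.c:1093 ?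
abbrev DGifDecompressInput.chk9 : Word := 0x1068b9  -- call __asan_store4_noabort; then mov DWORD PTR [r15],ebp | dgif_lib.c:1093 ?
abbrev DGifDecompressInput.chk10 : Word := 0x1068dd  -- call __asan_load4_noabort; then mov eax,DWORD PTR [rbx+0x14] | dgif_lib.c:1103 ?
abbrev DGifDecompressInput.chk11 : Word := 0x1068f8  -- call __asan_load4_noabort; then mov eax,DWORD PTR [rbx+0x1c] | dgif_lib.c:1104 ?

abbrev DGifDecompressLine.entry : Word := 0x106ae0  -- dgif_lib.c:861 ?
abbrev DGifDecompressLine.size : Nat := 1505  -- bytes of code: 0x106ae0 .. 0x1070c1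
abbrev DGifDecompressLine.insns : Nat := 362  -- instructions
abbrev DGifDecompressLine.loop1 : Word := 0x106be3  -- loop head: test ebx,ebx | dgif_lib.c:883 ?
abbrev DGifDecompressLine.loop2 : Word := 0x106c7e  -- loop head: cmp r12d,0xfff | dgif_lib.c:902 ?
abbrev DGifDecompressLine.loop3 : Word := 0x106e4b  -- loop head: cmp ebx,0xffe | dgif_lib.c:955 ?
abbrev DGifDecompressLine.loop4 : Word := 0x106f12  -- loop head: test ebx,ebx | dgif_lib.c:970 ?
abbrev DGifDecompressLine.loop5 : Word := 0x106f7d  -- loop head: mov eax,DWORD PTR [rsp+0x28] | dgif_lib.c:888 ?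
abbrev DGifDecompressLine.ret1 : Word := 0x106b46  -- after the call at 0x106b41 of __asan_load8_noabort | dgif_lib.c:866 ?
abbrev DGifDecompressLine.ret2 : Word := 0x106b53  -- after the call at 0x106b4e of __asan_load4_noabort | dgif_lib.c:868 ?
abbrev DGifDecompressLine.ret3 : Word := 0x106b78  -- after the call at 0x106b73 of __asan_load4_noabort | dgif_lib.c:872 ?
abbrev DGifDecompressLine.ret4 : Word := 0x106b89  -- after the call at 0x106b84 of __asan_load4_noabort | dgif_lib.c:873 ?
abbrev DGifDecompressLine.ret5 : Word := 0x106b9a  -- after the call at 0x106b95 of __asan_load4_noabort | dgif_lib.c:874 ?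
abbrev DGifDecompressLine.ret6 : Word := 0x106c1a  -- after the call at 0x106c15 of __asan_load1_noabort | dgif_lib.c:884 ?
abbrev DGifDecompressLine.ret7 : Word := 0x106c27  -- after the call at 0x106c22 of __asan_store1_noabort | dgif_lib.c:884 ?
abbrev DGifDecompressLine.ret8 : Word := 0x106c52  -- after the call at 0x106c4d of __asan_store4_noabort | dgif_lib.c:898 ?
abbrev DGifDecompressLine.ret9 : Word := 0x106c73  -- after the call at 0x106c6e of __asan_store4_noabort | dgif_lib.c:903 ?
abbrev DGifDecompressLine.ret10 : Word := 0x106c90  -- after the call at 0x106c8b of __asan_load4_noabort | dgif_lib.c:905 ?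
abbrev DGifDecompressLine.ret11 : Word := 0x106ca1  -- after the call at 0x106c9c of __asan_store4_noabort | dgif_lib.c:905 ?
abbrev DGifDecompressLine.ret12 : Word := 0x106cae  -- after the call at 0x106ca9 of __asan_load4_noabort | dgif_lib.c:906 ?
abbrev DGifDecompressLine.ret13 : Word := 0x106cbf  -- after the call at 0x106cba of __asan_store4_noabort | dgif_lib.c:906 ?
abbrev DGifDecompressLine.ret14 : Word := 0x106cd9  -- after the call at 0x106cd4 of __asan_store4_noabort | dgif_lib.c:907 ?
abbrev DGifDecompressLine.ret15 : Word := 0x106ce6  -- after the call at 0x106ce1 of __asan_store4_noabort | dgif_lib.c:908 ?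
abbrev DGifDecompressLine.ret16 : Word := 0x106d16  -- after the call at 0x106d11 of __asan_load4_noabort | dgif_lib.c:923 ?
abbrev DGifDecompressLine.ret17 : Word := 0x106d3b  -- after the call at 0x106d36 of __asan_load4_noabort | dgif_lib.c:933 ?
abbrev DGifDecompressLine.ret18 : Word := 0x106d56  -- after the call at 0x106d51 of DGifGetPrefixChar | dgif_lib.c:942 ?
abbrev DGifDecompressLine.ret19 : Word := 0x106d70  -- after the call at 0x106d6b of __asan_store1_noabort | dgif_lib.c:941 ?
abbrev DGifDecompressLine.ret20 : Word := 0x106d89  -- after the call at 0x106d84 of __asan_store1_noabort | dgif_lib.c:941 ?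
abbrev DGifDecompressLine.ret21 : Word := 0x106db7  -- after the call at 0x106db2 of DGifGetPrefixChar | dgif_lib.c:936 ?
abbrev DGifDecompressLine.ret22 : Word := 0x106dd1  -- after the call at 0x106dcc of __asan_store1_noabort | dgif_lib.c:935 ?
abbrev DGifDecompressLine.ret23 : Word := 0x106dea  -- after the call at 0x106de5 of __asan_store1_noabort | dgif_lib.c:935 ?
abbrev DGifDecompressLine.ret24 : Word := 0x106e28  -- after the call at 0x106e23 of __asan_load1_noabort | dgif_lib.c:958 ?
abbrev DGifDecompressLine.ret25 : Word := 0x106e35  -- after the call at 0x106e30 of __asan_store1_noabort | dgif_lib.c:958 ?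
abbrev DGifDecompressLine.ret26 : Word := 0x106e45  -- after the call at 0x106e40 of __asan_load4_noabort | dgif_lib.c:959 ?
abbrev DGifDecompressLine.ret27 : Word := 0x106e9e  -- after the call at 0x106e99 of __asan_store1_noabort | dgif_lib.c:967 ?
abbrev DGifDecompressLine.ret28 : Word := 0x106ecd  -- after the call at 0x106ec8 of __asan_store4_noabort | dgif_lib.c:963 ?
abbrev DGifDecompressLine.ret29 : Word := 0x106efe  -- after the call at 0x106ef9 of __asan_load1_noabort | dgif_lib.c:971 ?
abbrev DGifDecompressLine.ret30 : Word := 0x106f0b  -- after the call at 0x106f06 of __asan_store1_noabort | dgif_lib.c:971 ?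
abbrev DGifDecompressLine.ret31 : Word := 0x106f53  -- after the call at 0x106f4e of DGifGetPrefixChar | dgif_lib.c:987 ?
abbrev DGifDecompressLine.ret32 : Word := 0x106f6c  -- after the call at 0x106f67 of __asan_store1_noabort | dgif_lib.c:986 ?
abbrev DGifDecompressLine.ret33 : Word := 0x106f98  -- after the call at 0x106f93 of DGifDecompressInput | dgif_lib.c:889 ?
abbrev DGifDecompressLine.ret34 : Word := 0x106fe3  -- after the call at 0x106fde of __asan_store1_noabort | dgif_lib.c:916 ?
abbrev DGifDecompressLine.ret35 : Word := 0x106ffd  -- after the call at 0x106ff8 of __asan_load4_noabort | dgif_lib.c:975 ?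
abbrev DGifDecompressLine.ret36 : Word := 0x10701b  -- after the call at 0x107016 of __asan_load4_noabort | dgif_lib.c:976 ?
abbrev DGifDecompressLine.ret37 : Word := 0x107051  -- after the call at 0x10704c of DGifGetPrefixChar | dgif_lib.c:991 ?
abbrev DGifDecompressLine.ret38 : Word := 0x107069  -- after the call at 0x107064 of __asan_store1_noabort | dgif_lib.c:990 ?
abbrev DGifDecompressLine.chk1 : Word := 0x106b41  -- call __asan_load8_noabort; then mov r14,QWORD PTR [rbx+0x70] | dgif_lib.c:866 ?
abbrev DGifDecompressLine.chk2 : Word := 0x106b4e  -- call __asan_load4_noabort; then mov ebx,DWORD PTR [r14+0x28] | dgif_lib.c:868 ?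
abbrev DGifDecompressLine.chk3 : Word := 0x106b73  -- call __asan_load4_noabort; then mov eax,DWORD PTR [r14+0x10] | dgif_lib.c:872 ?
abbrev DGifDecompressLine.chk4 : Word := 0x106b84  -- call __asan_load4_noabort; then mov eax,DWORD PTR [r14+0xc] | dgif_lib.c:873 ?
abbrev DGifDecompressLine.chk5 : Word := 0x106b95  -- call __asan_load4_noabort; then mov eax,DWORD PTR [r14+0x20] | dgif_lib.c:874 ?
abbrev DGifDecompressLine.chk6 : Word := 0x106c15  -- call __asan_load1_noabort; then movzx r12d,BYTE PTR [r12] | dgif_lib.c:884 ?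
abbrev DGifDecompressLine.chk7 : Word := 0x106c22  -- call __asan_store1_noabort; then mov BYTE PTR [rbp+0x0],r12b | dgif_lib.c:884 ?
abbrev DGifDecompressLine.chk8 : Word := 0x106c4d  -- call __asan_store4_noabort; then mov DWORD PTR [rbx+0x60],0x71 | dgif_lib.c:898 ?
abbrev DGifDecompressLine.chk9 : Word := 0x106c6e  -- call __asan_store4_noabort; then mov DWORD PTR [r15],0x1002 | dgif_lib.c:903 ?
abbrev DGifDecompressLine.chk10 : Word := 0x106c8b  -- call __asan_load4_noabort; then mov eax,DWORD PTR [r14+0x10] | dgif_lib.c:905 ?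
abbrev DGifDecompressLine.chk11 : Word := 0x106c9c  -- call __asan_store4_noabort; then mov DWORD PTR [r14+0x14],r12d | dgif_lib.c:905 ?
abbrev DGifDecompressLine.chk12 : Word := 0x106ca9  -- call __asan_load4_noabort; then mov eax,DWORD PTR [r14+0x8] | dgif_lib.c:906 ?
abbrev DGifDecompressLine.chk13 : Word := 0x106cba  -- call __asan_store4_noabort; then mov DWORD PTR [r14+0x18],r12d | dgif_lib.c:906 ?
abbrev DGifDecompressLine.chk14 : Word := 0x106cd4  -- call __asan_store4_noabort; then mov DWORD PTR [r14+0x1c],r12d | dgif_lib.c:907 ?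
abbrev DGifDecompressLine.chk15 : Word := 0x106ce1  -- call __asan_store4_noabort; then mov DWORD PTR [r14+0x20],0x1002 | dgif_lib.c:908 ?
abbrev DGifDecompressLine.chk16 : Word := 0x106d11  -- call __asan_load4_noabort; then cmp DWORD PTR [r15],0x1002 | dgif_lib.c:923 ?
abbrev DGifDecompressLine.chk17 : Word := 0x106d36  -- call __asan_load4_noabort; then mov eax,DWORD PTR [r14+0x14] | dgif_lib.c:933 ?
abbrev DGifDecompressLine.chk18 : Word := 0x106d6b  -- call __asan_store1_noabort; then mov BYTE PTR [rbx],r12b | dgif_lib.c:941 ?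
abbrev DGifDecompressLine.chk19 : Word := 0x106d84  -- call __asan_store1_noabort; then mov BYTE PTR [rbx],r12b | dgif_lib.c:941 ?
abbrev DGifDecompressLine.chk20 : Word := 0x106dcc  -- call __asan_store1_noabort; then mov BYTE PTR [rbx],r12b | dgif_lib.c:935 ?
abbrev DGifDecompressLine.chk21 : Word := 0x106de5  -- call __asan_store1_noabort; then mov BYTE PTR [rbx],r12b | dgif_lib.c:935 ?
abbrev DGifDecompressLine.chk22 : Word := 0x106e23  -- call __asan_load1_noabort; then movzx r12d,BYTE PTR [r12] | dgif_lib.c:958 ?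
abbrev DGifDecompressLine.chk23 : Word := 0x106e30  -- call __asan_store1_noabort; then mov BYTE PTR [rbx],r12b | dgif_lib.c:958 ?
abbrev DGifDecompressLine.chk24 : Word := 0x106e40  -- call __asan_load4_noabort; then mov r12d,DWORD PTR [rbx] | dgif_lib.c:959 ?
abbrev DGifDecompressLine.chk25 : Word := 0x106e99  -- call __asan_store1_noabort; then mov BYTE PTR [rbx],r12b | dgif_lib.c:967 ?
abbrev DGifDecompressLine.chk26 : Word := 0x106ec8  -- call __asan_store4_noabort; then mov DWORD PTR [rbx+0x60],0x70 | dgif_lib.c:963 ?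
abbrev DGifDecompressLine.chk27 : Word := 0x106ef9  -- call __asan_load1_noabort; then movzx r12d,BYTE PTR [r12] | dgif_lib.c:971 ?
abbrev DGifDecompressLine.chk28 : Word := 0x106f06  -- call __asan_store1_noabort; then mov BYTE PTR [rbp+0x0],r12b | dgif_lib.c:971 ?
abbrev DGifDecompressLine.chk29 : Word := 0x106f67  -- call __asan_store1_noabort; then movzx eax,BYTE PTR [rsp+0x14] | dgif_lib.c:986 ?
abbrev DGifDecompressLine.chk30 : Word := 0x106fde  -- call __asan_store1_noabort; then mov BYTE PTR [rbp+0x0],r12b | dgif_lib.c:916 ?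
abbrev DGifDecompressLine.chk31 : Word := 0x106ff8  -- call __asan_load4_noabort; then mov eax,DWORD PTR [r14+0x14] | dgif_lib.c:975 ?
abbrev DGifDecompressLine.chk32 : Word := 0x107016  -- call __asan_load4_noabort; then cmp DWORD PTR [r12],0x1002 | dgif_lib.c:976 ?
abbrev DGifDecompressLine.chk33 : Word := 0x107064  -- call __asan_store1_noabort; then mov BYTE PTR [r15],r12b | dgif_lib.c:990 ?

abbrev fclose.entry : Word := 0x1076c0  -- gif_stubs.c:23 ?
abbrev fclose.size : Nat := 2  -- bytes of code: 0x1076c0 .. 0x1076c2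
abbrev fclose.insns : Nat := 1  -- instructions

abbrev openbsd_reallocarray.entry : Word := 0x107760  -- openbsd-reallocarray.c:21 ?
abbrev openbsd_reallocarray.size : Nat := 112  -- bytes of code: 0x107760 .. 0x1077d0
abbrev openbsd_reallocarray.insns : Nat := 34  -- instructions
abbrev openbsd_reallocarray.ret1 : Word := 0x1077ad  -- after the call at 0x1077a8 of realloc | openbsd-reallocarray.c:72 ?

abbrev GifBitSize.entry : Word := 0x107860  -- gifalloc.c:26 ?
abbrev GifBitSize.size : Nat := 29  -- bytes of code: 0x107860 .. 0x10787d
abbrev GifBitSize.insns : Nat := 11  -- instructions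
abbrev GifBitSize.loop1 : Word := 0x107865  -- loop head: cmp ecx,0x8 | gifalloc.c:26 ?

abbrev GifMakeMapObject.entry : Word := 0x107900  -- gifalloc.c:42 ?
abbrev GifMakeMapObject.size : Nat := 190  -- bytes of code: 0x107900 .. 0x1079be
abbrev GifMakeMapObject.insns : Nat := 61  -- instructions
abbrev GifMakeMapObject.ret1 : Word := 0x107918  -- after the call at 0x107913 of GifBitSize | gifalloc.c:48 ?
abbrev GifMakeMapObject.ret2 : Word := 0x107933  -- after the call at 0x10792e of malloc | gifalloc.c:52 ?
abbrev GifMakeMapObject.ret3 : Word := 0x10794b  -- after the call at 0x107946 of calloc | gifalloc.c:58 ?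
abbrev GifMakeMapObject.ret4 : Word := 0x107957  -- after the call at 0x107952 of __asan_store8_noabort | gifalloc.c:57 ?
abbrev GifMakeMapObject.ret5 : Word := 0x107968  -- after the call at 0x107963 of __asan_store4_noabort | gifalloc.c:64 ?
abbrev GifMakeMapObject.ret6 : Word := 0x107973  -- after the call at 0x10796e of __asan_store4_noabort | gifalloc.c:65 ?
abbrev GifMakeMapObject.ret7 : Word := 0x107980  -- after the call at 0x10797b of __asan_store1_noabort | gifalloc.c:66 ?
abbrev GifMakeMapObject.ret8 : Word := 0x107998  -- after the call at 0x107993 of memcpy | gifalloc.c:69 ?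
abbrev GifMakeMapObject.ret9 : Word := 0x1079a2  -- after the call at 0x10799d of free | gifalloc.c:60 ?
abbrev GifMakeMapObject.chk1 : Word := 0x107952  -- call __asan_store8_noabort; then mov QWORD PTR [rbx+0x10],r14 | gifalloc.c:57 ?
abbrev GifMakeMapObject.chk2 : Word := 0x107963  -- call __asan_store4_noabort; then mov DWORD PTR [rbx],ebp | gifalloc.c:64 ?
abbrev GifMakeMapObject.chk3 : Word := 0x10796e  -- call __asan_store4_noabort; then mov DWORD PTR [rbx+0x4],r12d | gifalloc.c:65 ?
abbrev GifMakeMapObject.chk4 : Word := 0x10797b  -- call __asan_store1_noabort; then mov BYTE PTR [rbx+0x8],0x0 | gifalloc.c:66 ?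

abbrev GifFreeMapObject.entry : Word := 0x107a80  -- gifalloc.c:80 ?
abbrev GifFreeMapObject.size : Nat := 38  -- bytes of code: 0x107a80 .. 0x107aa6
abbrev GifFreeMapObject.insns : Nat := 13  -- instructions
abbrev GifFreeMapObject.ret1 : Word := 0x107a92  -- after the call at 0x107a8d of __asan_load8_noabort | gifalloc.c:81 ?
abbrev GifFreeMapObject.ret2 : Word := 0x107a9b  -- after the call at 0x107a96 of free | gifalloc.c:81 ?
abbrev GifFreeMapObject.ret3 : Word := 0x107aa3  -- after the call at 0x107a9e of free | gifalloc.c:82 ?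
abbrev GifFreeMapObject.chk1 : Word := 0x107a8d  -- call __asan_load8_noabort; then mov rdi,QWORD PTR [rbx+0x10] | gifalloc.c:81 ?

abbrev GifAddExtensionBlock.entry : Word := 0x107b40  -- gifalloc.c:231 ?
abbrev GifAddExtensionBlock.size : Nat := 298  -- bytes of code: 0x107b40 .. 0x107c6a
abbrev GifAddExtensionBlock.insns : Nat := 88  -- instructions
abbrev GifAddExtensionBlock.ret1 : Word := 0x107b65  -- after the call at 0x107b60 of __asan_load8_noabort | gifalloc.c:234 ?
abbrev GifAddExtensionBlock.ret2 : Word := 0x107b79  -- after the call at 0x107b74 of __asan_load4_noabort | gifalloc.c:239 ?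
abbrev GifAddExtensionBlock.ret3 : Word := 0x107b8f  -- after the call at 0x107b8a of openbsd_reallocarray | gifalloc.c:238 ?
abbrev GifAddExtensionBlock.ret4 : Word := 0x107ba3  -- after the call at 0x107b9e of __asan_store8_noabort | gifalloc.c:244 ?
abbrev GifAddExtensionBlock.ret5 : Word := 0x107bae  -- after the call at 0x107ba9 of __asan_load8_noabort | gifalloc.c:247 ?
abbrev GifAddExtensionBlock.ret6 : Word := 0x107bc2  -- after the call at 0x107bbd of __asan_load4_noabort | gifalloc.c:251 ?
abbrev GifAddExtensionBlock.ret7 : Word := 0x107bde  -- after the call at 0x107bd9 of __asan_store4_noabort | gifalloc.c:253 ?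
abbrev GifAddExtensionBlock.ret8 : Word := 0x107bea  -- after the call at 0x107be5 of __asan_store4_noabort | gifalloc.c:254 ?
abbrev GifAddExtensionBlock.ret9 : Word := 0x107bf5  -- after the call at 0x107bf0 of malloc | gifalloc.c:255 ?
abbrev GifAddExtensionBlock.ret10 : Word := 0x107c01  -- after the call at 0x107bfc of __asan_store8_noabort | gifalloc.c:255 ?
abbrev GifAddExtensionBlock.ret11 : Word := 0x107c1d  -- after the call at 0x107c18 of memcpy | gifalloc.c:261 ?
abbrev GifAddExtensionBlock.ret12 : Word := 0x107c2e  -- after the call at 0x107c29 of malloc | gifalloc.c:236 ?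
abbrev GifAddExtensionBlock.ret13 : Word := 0x107c39  -- after the call at 0x107c34 of __asan_store8_noabort | gifalloc.c:235 ?
abbrev GifAddExtensionBlock.chk1 : Word := 0x107b60  -- call __asan_load8_noabort; then mov r15,QWORD PTR [rbx] | gifalloc.c:234 ?
abbrev GifAddExtensionBlock.chk2 : Word := 0x107b74  -- call __asan_load4_noabort; then mov eax,DWORD PTR [rbp+0x0] | gifalloc.c:239 ?
abbrev GifAddExtensionBlock.chk3 : Word := 0x107b9e  -- call __asan_store8_noabort; then mov QWORD PTR [rbx],r15 | gifalloc.c:244 ?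
abbrev GifAddExtensionBlock.chk4 : Word := 0x107ba9  -- call __asan_load8_noabort; then mov rbx,QWORD PTR [rbx] | gifalloc.c:247 ?
abbrev GifAddExtensionBlock.chk5 : Word := 0x107bbd  -- call __asan_load4_noabort; then mov eax,DWORD PTR [rbp+0x0] | gifalloc.c:251 ?
abbrev GifAddExtensionBlock.chk6 : Word := 0x107bd9  -- call __asan_store4_noabort; then mov DWORD PTR [rbx+0x10],r14d | gifalloc.c:253 ?
abbrev GifAddExtensionBlock.chk7 : Word := 0x107be5  -- call __asan_store4_noabort; then mov DWORD PTR [rbx],r12d | gifalloc.c:254 ?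
abbrev GifAddExtensionBlock.chk8 : Word := 0x107bfc  -- call __asan_store8_noabort; then mov QWORD PTR [rbx+0x8],rbp | gifalloc.c:255 ?
abbrev GifAddExtensionBlock.chk9 : Word := 0x107c34  -- call __asan_store8_noabort; then mov QWORD PTR [rbx],r15 | gifalloc.c:235 ?

abbrev GifFreeExtensions.entry : Word := 0x107da0  -- gifalloc.c:268 ?
abbrev GifFreeExtensions.size : Nat := 146  -- bytes of code: 0x107da0 .. 0x107e32
abbrev GifFreeExtensions.insns : Nat := 42  -- instructions
abbrev GifFreeExtensions.loop1 : Word := 0x107dd9  -- loop head: mov rdi,rbp | gifalloc.c:276 ?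
abbrev GifFreeExtensions.ret1 : Word := 0x107db8  -- after the call at 0x107db3 of __asan_load8_noabort | gifalloc.c:271 ?
abbrev GifFreeExtensions.ret2 : Word := 0x107dcc  -- after the call at 0x107dc7 of __asan_load8_noabort | gifalloc.c:277 ?
abbrev GifFreeExtensions.ret3 : Word := 0x107dd5  -- after the call at 0x107dd0 of free | gifalloc.c:277 ?
abbrev GifFreeExtensions.ret4 : Word := 0x107de1  -- after the call at 0x107ddc of __asan_load8_noabort | gifalloc.c:276 ?
abbrev GifFreeExtensions.ret5 : Word := 0x107ded  -- after the call at 0x107de8 of __asan_load4_noabort | gifalloc.c:276 ?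
abbrev GifFreeExtensions.ret6 : Word := 0x107e07  -- after the call at 0x107e02 of free | gifalloc.c:279 ?
abbrev GifFreeExtensions.ret7 : Word := 0x107e0f  -- after the call at 0x107e0a of __asan_store8_noabort | gifalloc.c:280 ?
abbrev GifFreeExtensions.ret8 : Word := 0x107e1f  -- after the call at 0x107e1a of __asan_store4_noabort | gifalloc.c:281 ?
abbrev GifFreeExtensions.chk1 : Word := 0x107db3  -- call __asan_load8_noabort; then mov rbx,QWORD PTR [rbp+0x0] | gifalloc.c:271 ?
abbrev GifFreeExtensions.chk2 : Word := 0x107dc7  -- call __asan_load8_noabort; then mov rdi,QWORD PTR [rbx+0x8] | gifalloc.c:277 ?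
abbrev GifFreeExtensions.chk3 : Word := 0x107ddc  -- call __asan_load8_noabort; then mov r13,QWORD PTR [rbp+0x0] | gifalloc.c:276 ?
abbrev GifFreeExtensions.chk4 : Word := 0x107de8  -- call __asan_load4_noabort; then movsxd rax,DWORD PTR [r12] | gifalloc.c:276 ?
abbrev GifFreeExtensions.chk5 : Word := 0x107e0a  -- call __asan_store8_noabort; then mov QWORD PTR [rbp+0x0],0x0 | gifalloc.c:280 ?
abbrev GifFreeExtensions.chk6 : Word := 0x107e1a  -- call __asan_store4_noabort; then mov DWORD PTR [r12],0x0 | gifalloc.c:281 ?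

abbrev GifFreeSavedImages.entry : Word := 0x107ee0  -- gifalloc.c:434 ?
abbrev GifFreeSavedImages.size : Nat := 198  -- bytes of code: 0x107ee0 .. 0x107fa6
abbrev GifFreeSavedImages.insns : Nat := 53  -- instructions
abbrev GifFreeSavedImages.loop1 : Word := 0x107f18  -- loop head: lea rdi,[rbp+0x48] | gifalloc.c:438 ?
abbrev GifFreeSavedImages.ret1 : Word := 0x107ef9  -- after the call at 0x107ef4 of __asan_load8_noabort | gifalloc.c:434 ?
abbrev GifFreeSavedImages.ret2 : Word := 0x107f14  -- after the call at 0x107f0f of GifFreeExtensions | gifalloc.c:448 ?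
abbrev GifFreeSavedImages.ret3 : Word := 0x107f21  -- after the call at 0x107f1c of __asan_load8_noabort | gifalloc.c:438 ?
abbrev GifFreeSavedImages.ret4 : Word := 0x107f2e  -- after the call at 0x107f29 of __asan_load4_noabort | gifalloc.c:438 ?
abbrev GifFreeSavedImages.ret5 : Word := 0x107f4f  -- after the call at 0x107f4a of __asan_load8_noabort | gifalloc.c:439 ?
abbrev GifFreeSavedImages.ret6 : Word := 0x107f5d  -- after the call at 0x107f58 of GifFreeMapObject | gifalloc.c:440 ?
abbrev GifFreeSavedImages.ret7 : Word := 0x107f66  -- after the call at 0x107f61 of __asan_store8_noabort | gifalloc.c:441 ?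
abbrev GifFreeSavedImages.ret8 : Word := 0x107f77  -- after the call at 0x107f72 of __asan_load8_noabort | gifalloc.c:444 ?
abbrev GifFreeSavedImages.ret9 : Word := 0x107f85  -- after the call at 0x107f80 of free | gifalloc.c:445 ?
abbrev GifFreeSavedImages.ret10 : Word := 0x107f8f  -- after the call at 0x107f8a of free | gifalloc.c:451 ?
abbrev GifFreeSavedImages.ret11 : Word := 0x107f98  -- after the call at 0x107f93 of __asan_store8_noabort | gifalloc.c:452 ?
abbrev GifFreeSavedImages.chk1 : Word := 0x107ef4  -- call __asan_load8_noabort; then mov rbx,QWORD PTR [rbp+0x48] | gifalloc.c:434 ?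
abbrev GifFreeSavedImages.chk2 : Word := 0x107f1c  -- call __asan_load8_noabort; then mov r12,QWORD PTR [rbp+0x48] | gifalloc.c:438 ?
abbrev GifFreeSavedImages.chk3 : Word := 0x107f29  -- call __asan_load4_noabort; then movsxd rdx,DWORD PTR [rbp+0x20] | gifalloc.c:438 ?
abbrev GifFreeSavedImages.chk4 : Word := 0x107f4a  -- call __asan_load8_noabort; then mov rdi,QWORD PTR [rbx+0x18] | gifalloc.c:439 ?
abbrev GifFreeSavedImages.chk5 : Word := 0x107f61  -- call __asan_store8_noabort; then mov QWORD PTR [rbx+0x18],0x0 | gifalloc.c:441 ?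
abbrev GifFreeSavedImages.chk6 : Word := 0x107f72  -- call __asan_load8_noabort; then mov rdi,QWORD PTR [rbx+0x20] | gifalloc.c:444 ?
abbrev GifFreeSavedImages.chk7 : Word := 0x107f93  -- call __asan_store8_noabort; then mov QWORD PTR [rbp+0x48],0x0 | gifalloc.c:452 ?

abbrev DGifGetScreenDesc.entry : Word := 0x108080  -- dgif_lib.c:248 ?
abbrev DGifGetScreenDesc.size : Nat := 757  -- bytes of code: 0x108080 .. 0x108375
abbrev DGifGetScreenDesc.insns : Nat := 176  -- instructions
abbrev DGifGetScreenDesc.loop1 : Word := 0x108253  -- loop head: mov r12,QWORD PTR [rbx+0x18] | dgif_lib.c:288 ?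
abbrev DGifGetScreenDesc.ret1 : Word := 0x1080cf  -- after the call at 0x1080ca of __asan_load8_noabort | dgif_lib.c:252 ?
abbrev DGifGetScreenDesc.ret2 : Word := 0x1080db  -- after the call at 0x1080d6 of __asan_load4_noabort | dgif_lib.c:254 ?
abbrev DGifGetScreenDesc.ret3 : Word := 0x1080f0  -- after the call at 0x1080eb of __asan_store4_noabort | dgif_lib.c:256 ?
abbrev DGifGetScreenDesc.ret4 : Word := 0x10811f  -- after the call at 0x10811a of DGifGetWord | dgif_lib.c:261 ?
abbrev DGifGetScreenDesc.ret5 : Word := 0x108137  -- after the call at 0x108132 of DGifGetWord | dgif_lib.c:262 ?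
abbrev DGifGetScreenDesc.ret6 : Word := 0x10814d  -- after the call at 0x108148 of InternalRead | dgif_lib.c:266 ?
abbrev DGifGetScreenDesc.ret7 : Word := 0x108170  -- after the call at 0x10816b of __asan_store4_noabort | dgif_lib.c:272 ?
abbrev DGifGetScreenDesc.ret8 : Word := 0x108199  -- after the call at 0x108194 of __asan_store4_noabort | dgif_lib.c:275 ?
abbrev DGifGetScreenDesc.ret9 : Word := 0x1081ac  -- after the call at 0x1081a7 of __asan_store1_noabort | dgif_lib.c:276 ?
abbrev DGifGetScreenDesc.ret10 : Word := 0x1081be  -- after the call at 0x1081b9 of __asan_store8_noabort | dgif_lib.c:301 ?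
abbrev DGifGetScreenDesc.ret11 : Word := 0x1081da  -- after the call at 0x1081d5 of __asan_store4_noabort | dgif_lib.c:267 ?
abbrev DGifGetScreenDesc.ret12 : Word := 0x1081ed  -- after the call at 0x1081e8 of __asan_load8_noabort | dgif_lib.c:268 ?
abbrev DGifGetScreenDesc.ret13 : Word := 0x1081f6  -- after the call at 0x1081f1 of GifFreeMapObject | dgif_lib.c:268 ?
abbrev DGifGetScreenDesc.ret14 : Word := 0x1081fe  -- after the call at 0x1081f9 of __asan_store8_noabort | dgif_lib.c:269 ?
abbrev DGifGetScreenDesc.ret15 : Word := 0x108225  -- after the call at 0x108220 of GifMakeMapObject | dgif_lib.c:280 ?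
abbrev DGifGetScreenDesc.ret16 : Word := 0x108231  -- after the call at 0x10822c of __asan_store8_noabort | dgif_lib.c:280 ?
abbrev DGifGetScreenDesc.ret17 : Word := 0x108248  -- after the call at 0x108243 of __asan_store1_noabort | dgif_lib.c:287 ?
abbrev DGifGetScreenDesc.ret18 : Word := 0x10825f  -- after the call at 0x10825a of __asan_load4_noabort | dgif_lib.c:288 ?
abbrev DGifGetScreenDesc.ret19 : Word := 0x10827b  -- after the call at 0x108276 of InternalRead | dgif_lib.c:290 ?
abbrev DGifGetScreenDesc.ret20 : Word := 0x10828d  -- after the call at 0x108288 of __asan_load8_noabort | dgif_lib.c:296 ?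
abbrev DGifGetScreenDesc.ret21 : Word := 0x10829a  -- after the call at 0x108295 of __asan_load8_noabort | dgif_lib.c:296 ?
abbrev DGifGetScreenDesc.ret22 : Word := 0x1082b9  -- after the call at 0x1082b4 of __asan_store1_noabort | dgif_lib.c:296 ?
abbrev DGifGetScreenDesc.ret23 : Word := 0x1082c9  -- after the call at 0x1082c4 of __asan_load8_noabort | dgif_lib.c:297 ?
abbrev DGifGetScreenDesc.ret24 : Word := 0x1082e2  -- after the call at 0x1082dd of __asan_store1_noabort | dgif_lib.c:297 ?
abbrev DGifGetScreenDesc.ret25 : Word := 0x1082f3  -- after the call at 0x1082ee of __asan_load8_noabort | dgif_lib.c:298 ?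
abbrev DGifGetScreenDesc.ret26 : Word := 0x108307  -- after the call at 0x108302 of __asan_store1_noabort | dgif_lib.c:298 ?
abbrev DGifGetScreenDesc.ret27 : Word := 0x10831e  -- after the call at 0x108319 of __asan_store4_noabort | dgif_lib.c:282 ?
abbrev DGifGetScreenDesc.ret28 : Word := 0x108336  -- after the call at 0x108331 of __asan_load8_noabort | dgif_lib.c:291 ?
abbrev DGifGetScreenDesc.ret29 : Word := 0x10833f  -- after the call at 0x10833a of GifFreeMapObject | dgif_lib.c:291 ?
abbrev DGifGetScreenDesc.ret30 : Word := 0x108347  -- after the call at 0x108342 of __asan_store8_noabort | dgif_lib.c:292 ?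
abbrev DGifGetScreenDesc.ret31 : Word := 0x108358  -- after the call at 0x108353 of __asan_store4_noabort | dgif_lib.c:293 ?
abbrev DGifGetScreenDesc.chk1 : Word := 0x1080ca  -- call __asan_load8_noabort; then mov r12,QWORD PTR [rbx+0x70] | dgif_lib.c:252 ?
abbrev DGifGetScreenDesc.chk2 : Word := 0x1080d6  -- call __asan_load4_noabort; then mov eax,DWORD PTR [r12] | dgif_lib.c:254 ?
abbrev DGifGetScreenDesc.chk3 : Word := 0x1080eb  -- call __asan_store4_noabort; then mov DWORD PTR [rbx+0x60],0x6f | dgif_lib.c:256 ?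
abbrev DGifGetScreenDesc.chk4 : Word := 0x10816b  -- call __asan_store4_noabort; then mov DWORD PTR [rbx+0x8],r12d | dgif_lib.c:272 ?
abbrev DGifGetScreenDesc.chk5 : Word := 0x108194  -- call __asan_store4_noabort; then mov DWORD PTR [rbx+0xc],r15d | dgif_lib.c:275 ?
abbrev DGifGetScreenDesc.chk6 : Word := 0x1081a7  -- call __asan_store1_noabort; then mov BYTE PTR [rbx+0x10],r15b | dgif_lib.c:276 ?
abbrev DGifGetScreenDesc.chk7 : Word := 0x1081b9  -- call __asan_store8_noabort; then mov QWORD PTR [rbx+0x18],0x0 | dgif_lib.c:301 ?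
abbrev DGifGetScreenDesc.chk8 : Word := 0x1081d5  -- call __asan_store4_noabort; then mov DWORD PTR [rbx+0x60],0x66 | dgif_lib.c:267 ?
abbrev DGifGetScreenDesc.chk9 : Word := 0x1081e8  -- call __asan_load8_noabort; then mov rdi,QWORD PTR [rbx+0x18] | dgif_lib.c:268 ?
abbrev DGifGetScreenDesc.chk10 : Word := 0x1081f9  -- call __asan_store8_noabort; then mov QWORD PTR [rbx+0x18],0x0 | dgif_lib.c:269 ?
abbrev DGifGetScreenDesc.chk11 : Word := 0x10822c  -- call __asan_store8_noabort; then mov QWORD PTR [rbx+0x18],r12 | dgif_lib.c:280 ?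
abbrev DGifGetScreenDesc.chk12 : Word := 0x108243  -- call __asan_store1_noabort; then mov BYTE PTR [r12+0x8],r14b | dgif_lib.c:287 ?
abbrev DGifGetScreenDesc.chk13 : Word := 0x10825a  -- call __asan_load4_noabort; then cmp DWORD PTR [r12],r13d | dgif_lib.c:288 ?
abbrev DGifGetScreenDesc.chk14 : Word := 0x108288  -- call __asan_load8_noabort; then mov r14,QWORD PTR [rbx+0x18] | dgif_lib.c:296 ?
abbrev DGifGetScreenDesc.chk15 : Word := 0x108295  -- call __asan_load8_noabort; then movsxd rax,r13d | dgif_lib.c:296 ?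
abbrev DGifGetScreenDesc.chk16 : Word := 0x1082b4  -- call __asan_store1_noabort; then mov BYTE PTR [r14],r15b | dgif_lib.c:296 ?
abbrev DGifGetScreenDesc.chk17 : Word := 0x1082c4  -- call __asan_load8_noabort; then mov rax,r12 | dgif_lib.c:297 ?
abbrev DGifGetScreenDesc.chk18 : Word := 0x1082dd  -- call __asan_store1_noabort; then mov BYTE PTR [r14+0x1],r15b | dgif_lib.c:297 ?
abbrev DGifGetScreenDesc.chk19 : Word := 0x1082ee  -- call __asan_load8_noabort; then add r12,QWORD PTR [r14+0x10] | dgif_lib.c:298 ?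
abbrev DGifGetScreenDesc.chk20 : Word := 0x108302  -- call __asan_store1_noabort; then mov BYTE PTR [r12+0x2],r14b | dgif_lib.c:298 ?
abbrev DGifGetScreenDesc.chk21 : Word := 0x108319  -- call __asan_store4_noabort; then mov DWORD PTR [rbx+0x60],0x6d | dgif_lib.c:282 ?
abbrev DGifGetScreenDesc.chk22 : Word := 0x108331  -- call __asan_load8_noabort; then mov rdi,QWORD PTR [rbx+0x18] | dgif_lib.c:291 ?
abbrev DGifGetScreenDesc.chk23 : Word := 0x108342  -- call __asan_store8_noabort; then mov QWORD PTR [rbx+0x18],0x0 | dgif_lib.c:292 ?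
abbrev DGifGetScreenDesc.chk24 : Word := 0x108353  -- call __asan_store4_noabort; then mov DWORD PTR [rbx+0x60],0x66 | dgif_lib.c:293 ?

abbrev DGifOpen.entry : Word := 0x108680  -- dgif_lib.c:167 ?
abbrev DGifOpen.size : Nat := 634  -- bytes of code: 0x108680 .. 0x1088fa
abbrev DGifOpen.insns : Nat := 143  -- instructions
abbrev DGifOpen.ret1 : Word := 0x1086da  -- after the call at 0x1086d5 of malloc | dgif_lib.c:172 ?
abbrev DGifOpen.ret2 : Word := 0x1086f8  -- after the call at 0x1086f3 of memset | dgif_lib.c:180 ?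
abbrev DGifOpen.ret3 : Word := 0x108701  -- after the call at 0x1086fc of __asan_store8_noabort | dgif_lib.c:183 ?
abbrev DGifOpen.ret4 : Word := 0x108712  -- after the call at 0x10870d of __asan_store8_noabort | dgif_lib.c:184 ?
abbrev DGifOpen.ret5 : Word := 0x108729  -- after the call at 0x108724 of calloc | dgif_lib.c:186 ?
abbrev DGifOpen.ret6 : Word := 0x108747  -- after the call at 0x108742 of memset | dgif_lib.c:194 ?
abbrev DGifOpen.ret7 : Word := 0x108750  -- after the call at 0x10874b of __asan_store8_noabort | dgif_lib.c:196 ?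
abbrev DGifOpen.ret8 : Word := 0x10875d  -- after the call at 0x108758 of __asan_store4_noabort | dgif_lib.c:197 ?
abbrev DGifOpen.ret9 : Word := 0x10876d  -- after the call at 0x108768 of __asan_store8_noabort | dgif_lib.c:198 ?
abbrev DGifOpen.ret10 : Word := 0x10877d  -- after the call at 0x108778 of __asan_store4_noabort | dgif_lib.c:199 ?
abbrev DGifOpen.ret11 : Word := 0x10878d  -- after the call at 0x108788 of __asan_store8_noabort | dgif_lib.c:201 ?
abbrev DGifOpen.ret12 : Word := 0x10879a  -- after the call at 0x108795 of __asan_store8_noabort | dgif_lib.c:202 ?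
abbrev DGifOpen.ret13 : Word := 0x1087b0  -- after the call at 0x1087ab of InternalRead | dgif_lib.c:206 ?
abbrev DGifOpen.ret14 : Word := 0x1087d2  -- after the call at 0x1087cd of strncmp | dgif_lib.c:218 ?
abbrev DGifOpen.ret15 : Word := 0x1087e2  -- after the call at 0x1087dd of DGifGetScreenDesc | dgif_lib.c:227 ?
abbrev DGifOpen.ret16 : Word := 0x1087f3  -- after the call at 0x1087ee of __asan_store4_noabort | dgif_lib.c:236 ?
abbrev DGifOpen.ret17 : Word := 0x10880f  -- after the call at 0x10880a of __asan_store1_noabort | dgif_lib.c:239 ?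
abbrev DGifOpen.ret18 : Word := 0x108841  -- after the call at 0x10883c of __asan_store4_noabort | dgif_lib.c:175 ?
abbrev DGifOpen.ret19 : Word := 0x108858  -- after the call at 0x108853 of __asan_store4_noabort | dgif_lib.c:189 ?
abbrev DGifOpen.ret20 : Word := 0x108868  -- after the call at 0x108863 of free | dgif_lib.c:191 ?
abbrev DGifOpen.ret21 : Word := 0x10887a  -- after the call at 0x108875 of __asan_store4_noabort | dgif_lib.c:209 ?
abbrev DGifOpen.ret22 : Word := 0x10888a  -- after the call at 0x108885 of free | dgif_lib.c:211 ?
abbrev DGifOpen.ret23 : Word := 0x108892  -- after the call at 0x10888d of free | dgif_lib.c:212 ?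
abbrev DGifOpen.ret24 : Word := 0x1088a9  -- after the call at 0x1088a4 of __asan_store4_noabort | dgif_lib.c:220 ?
abbrev DGifOpen.ret25 : Word := 0x1088b9  -- after the call at 0x1088b4 of free | dgif_lib.c:222 ?
abbrev DGifOpen.ret26 : Word := 0x1088c1  -- after the call at 0x1088bc of free | dgif_lib.c:223 ?
abbrev DGifOpen.ret27 : Word := 0x1088d3  -- after the call at 0x1088ce of free | dgif_lib.c:228 ?
abbrev DGifOpen.ret28 : Word := 0x1088db  -- after the call at 0x1088d6 of free | dgif_lib.c:229 ?
abbrev DGifOpen.ret29 : Word := 0x1088e8  -- after the call at 0x1088e3 of __asan_store4_noabort | dgif_lib.c:231 ?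
abbrev DGifOpen.chk1 : Word := 0x1086fc  -- call __asan_store8_noabort; then mov QWORD PTR [rbx+0x48],0x0 | dgif_lib.c:183 ?
abbrev DGifOpen.chk2 : Word := 0x10870d  -- call __asan_store8_noabort; then mov QWORD PTR [rbx+0x18],0x0 | dgif_lib.c:184 ?
abbrev DGifOpen.chk3 : Word := 0x10874b  -- call __asan_store8_noabort; then mov QWORD PTR [rbx+0x70],rbp | dgif_lib.c:196 ?
abbrev DGifOpen.chk4 : Word := 0x108758  -- call __asan_store4_noabort; then mov DWORD PTR [rbp+0x4],0x0 | dgif_lib.c:197 ?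
abbrev DGifOpen.chk5 : Word := 0x108768  -- call __asan_store8_noabort; then mov QWORD PTR [rbp+0x40],0x0 | dgif_lib.c:198 ?
abbrev DGifOpen.chk6 : Word := 0x108778  -- call __asan_store4_noabort; then mov DWORD PTR [rbp+0x0],0x8 | dgif_lib.c:199 ?
abbrev DGifOpen.chk7 : Word := 0x108788  -- call __asan_store8_noabort; then mov QWORD PTR [rbp+0x48],r15 | dgif_lib.c:201 ?
abbrev DGifOpen.chk8 : Word := 0x108795  -- call __asan_store8_noabort; then mov QWORD PTR [rbx+0x68],r14 | dgif_lib.c:202 ?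
abbrev DGifOpen.chk9 : Word := 0x1087ee  -- call __asan_store4_noabort; then mov DWORD PTR [rbx+0x60],0x0 | dgif_lib.c:236 ?
abbrev DGifOpen.chk10 : Word := 0x10880a  -- call __asan_store1_noabort; then mov BYTE PTR [rbp+0x6160],r13b | dgif_lib.c:239 ?
abbrev DGifOpen.chk11 : Word := 0x10883c  -- call __asan_store4_noabort; then mov DWORD PTR [r13+0x0],0x6d | dgif_lib.c:175 ?
abbrev DGifOpen.chk12 : Word := 0x108853  -- call __asan_store4_noabort; then mov DWORD PTR [r13+0x0],0x6d | dgif_lib.c:189 ?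
abbrev DGifOpen.chk13 : Word := 0x108875  -- call __asan_store4_noabort; then mov DWORD PTR [r13+0x0],0x66 | dgif_lib.c:209 ?
abbrev DGifOpen.chk14 : Word := 0x1088a4  -- call __asan_store4_noabort; then mov DWORD PTR [r13+0x0],0x67 | dgif_lib.c:220 ?
abbrev DGifOpen.chk15 : Word := 0x1088e3  -- call __asan_store4_noabort; then mov DWORD PTR [r13+0x0],0x68 | dgif_lib.c:231 ?

abbrev DGifGetRecordType.entry : Word := 0x108b80  -- dgif_lib.c:325 ?
abbrev DGifGetRecordType.size : Nat := 312  -- bytes of code: 0x108b80 .. 0x108cb8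
abbrev DGifGetRecordType.insns : Nat := 72  -- instructions
abbrev DGifGetRecordType.ret1 : Word := 0x108bd2  -- after the call at 0x108bcd of __asan_load8_noabort | dgif_lib.c:327 ?
abbrev DGifGetRecordType.ret2 : Word := 0x108bde  -- after the call at 0x108bd9 of __asan_load4_noabort | dgif_lib.c:329 ?
abbrev DGifGetRecordType.ret3 : Word := 0x108bee  -- after the call at 0x108be9 of __asan_store4_noabort | dgif_lib.c:331 ?
abbrev DGifGetRecordType.ret4 : Word := 0x108c20  -- after the call at 0x108c1b of InternalRead | dgif_lib.c:336 ?
abbrev DGifGetRecordType.ret5 : Word := 0x108c30  -- after the call at 0x108c2b of __asan_store4_noabort | dgif_lib.c:337 ?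
abbrev DGifGetRecordType.ret6 : Word := 0x108c57  -- after the call at 0x108c52 of __asan_store4_noabort | dgif_lib.c:353 ?
abbrev DGifGetRecordType.ret7 : Word := 0x108c68  -- after the call at 0x108c63 of __asan_store4_noabort | dgif_lib.c:354 ?
abbrev DGifGetRecordType.ret8 : Word := 0x108c81  -- after the call at 0x108c7c of __asan_store4_noabort | dgif_lib.c:344 ?
abbrev DGifGetRecordType.ret9 : Word := 0x108c96  -- after the call at 0x108c91 of __asan_store4_noabort | dgif_lib.c:347 ?
abbrev DGifGetRecordType.ret10 : Word := 0x108cab  -- after the call at 0x108ca6 of __asan_store4_noabort | dgif_lib.c:350 ?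
abbrev DGifGetRecordType.chk1 : Word := 0x108bcd  -- call __asan_load8_noabort; then mov rbx,QWORD PTR [rbp+0x70] | dgif_lib.c:327 ?
abbrev DGifGetRecordType.chk2 : Word := 0x108bd9  -- call __asan_load4_noabort; then mov ebx,DWORD PTR [rbx] | dgif_lib.c:329 ?
abbrev DGifGetRecordType.chk3 : Word := 0x108be9  -- call __asan_store4_noabort; then mov DWORD PTR [rbp+0x60],0x6f | dgif_lib.c:331 ?
abbrev DGifGetRecordType.chk4 : Word := 0x108c2b  -- call __asan_store4_noabort; then mov DWORD PTR [rbp+0x60],0x66 | dgif_lib.c:337 ?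
abbrev DGifGetRecordType.chk5 : Word := 0x108c52  -- call __asan_store4_noabort; then mov DWORD PTR [r13+0x0],0x0 | dgif_lib.c:353 ?
abbrev DGifGetRecordType.chk6 : Word := 0x108c63  -- call __asan_store4_noabort; then mov DWORD PTR [rbp+0x60],0x6b | dgif_lib.c:354 ?
abbrev DGifGetRecordType.chk7 : Word := 0x108c7c  -- call __asan_store4_noabort; then mov DWORD PTR [r13+0x0],0x2 | dgif_lib.c:344 ?
abbrev DGifGetRecordType.chk8 : Word := 0x108c91  -- call __asan_store4_noabort; then mov DWORD PTR [r13+0x0],0x3 | dgif_lib.c:347 ?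
abbrev DGifGetRecordType.chk9 : Word := 0x108ca6  -- call __asan_store4_noabort; then mov DWORD PTR [r13+0x0],0x4 | dgif_lib.c:350 ?

abbrev DGifGetImageHeader.entry : Word := 0x108e00  -- dgif_lib.c:361 ?
abbrev DGifGetImageHeader.size : Nat := 803  -- bytes of code: 0x108e00 .. 0x109123
abbrev DGifGetImageHeader.insns : Nat := 189  -- instructions
abbrev DGifGetImageHeader.loop1 : Word := 0x108ffe  -- loop head: mov r13,QWORD PTR [rbx+0x40] | dgif_lib.c:404 ?
abbrev DGifGetImageHeader.ret1 : Word := 0x108e52  -- after the call at 0x108e4d of __asan_load8_noabort | dgif_lib.c:364 ?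
abbrev DGifGetImageHeader.ret2 : Word := 0x108e5e  -- after the call at 0x108e59 of __asan_load4_noabort | dgif_lib.c:366 ?
abbrev DGifGetImageHeader.ret3 : Word := 0x108e71  -- after the call at 0x108e6c of __asan_store4_noabort | dgif_lib.c:368 ?
abbrev DGifGetImageHeader.ret4 : Word := 0x108ea1  -- after the call at 0x108e9c of DGifGetWord | dgif_lib.c:372 ?
abbrev DGifGetImageHeader.ret5 : Word := 0x108eb9  -- after the call at 0x108eb4 of DGifGetWord | dgif_lib.c:373 ?
abbrev DGifGetImageHeader.ret6 : Word := 0x108ec9  -- after the call at 0x108ec4 of DGifGetWord | dgif_lib.c:374 ?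
abbrev DGifGetImageHeader.ret7 : Word := 0x108ed9  -- after the call at 0x108ed4 of DGifGetWord | dgif_lib.c:375 ?
abbrev DGifGetImageHeader.ret8 : Word := 0x108eef  -- after the call at 0x108eea of InternalRead | dgif_lib.c:378 ?
abbrev DGifGetImageHeader.ret9 : Word := 0x108f1b  -- after the call at 0x108f16 of __asan_store1_noabort | dgif_lib.c:385 ?
abbrev DGifGetImageHeader.ret10 : Word := 0x108f28  -- after the call at 0x108f23 of __asan_load8_noabort | dgif_lib.c:388 ?
abbrev DGifGetImageHeader.ret11 : Word := 0x108f36  -- after the call at 0x108f31 of GifFreeMapObject | dgif_lib.c:389 ?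
abbrev DGifGetImageHeader.ret12 : Word := 0x108f3f  -- after the call at 0x108f3a of __asan_store8_noabort | dgif_lib.c:390 ?
abbrev DGifGetImageHeader.ret13 : Word := 0x108f57  -- after the call at 0x108f52 of __asan_load4_noabort | dgif_lib.c:419 ?
abbrev DGifGetImageHeader.ret14 : Word := 0x108f64  -- after the call at 0x108f5f of __asan_load4_noabort | dgif_lib.c:420 ?
abbrev DGifGetImageHeader.ret15 : Word := 0x108f76  -- after the call at 0x108f71 of __asan_store8_noabort | dgif_lib.c:418 ?
abbrev DGifGetImageHeader.ret16 : Word := 0x108f83  -- after the call at 0x108f7e of DGifSetupDecompress | dgif_lib.c:423 ?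
abbrev DGifGetImageHeader.ret17 : Word := 0x108f94  -- after the call at 0x108f8f of __asan_store4_noabort | dgif_lib.c:379 ?
abbrev DGifGetImageHeader.ret18 : Word := 0x108fa7  -- after the call at 0x108fa2 of __asan_load8_noabort | dgif_lib.c:380 ?
abbrev DGifGetImageHeader.ret19 : Word := 0x108fb0  -- after the call at 0x108fab of GifFreeMapObject | dgif_lib.c:380 ?
abbrev DGifGetImageHeader.ret20 : Word := 0x108fb8  -- after the call at 0x108fb3 of __asan_store8_noabort | dgif_lib.c:381 ?
abbrev DGifGetImageHeader.ret21 : Word := 0x108fdf  -- after the call at 0x108fda of GifMakeMapObject | dgif_lib.c:397 ?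
abbrev DGifGetImageHeader.ret22 : Word := 0x108feb  -- after the call at 0x108fe6 of __asan_store8_noabort | dgif_lib.c:396 ?
abbrev DGifGetImageHeader.ret23 : Word := 0x10900a  -- after the call at 0x109005 of __asan_load4_noabort | dgif_lib.c:404 ?
abbrev DGifGetImageHeader.ret24 : Word := 0x109026  -- after the call at 0x109021 of InternalRead | dgif_lib.c:406 ?
abbrev DGifGetImageHeader.ret25 : Word := 0x109038  -- after the call at 0x109033 of __asan_load8_noabort | dgif_lib.c:412 ?
abbrev DGifGetImageHeader.ret26 : Word := 0x109045  -- after the call at 0x109040 of __asan_load8_noabort | dgif_lib.c:412 ?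
abbrev DGifGetImageHeader.ret27 : Word := 0x109067  -- after the call at 0x109062 of __asan_store1_noabort | dgif_lib.c:412 ?
abbrev DGifGetImageHeader.ret28 : Word := 0x10907c  -- after the call at 0x109077 of __asan_load8_noabort | dgif_lib.c:413 ?
abbrev DGifGetImageHeader.ret29 : Word := 0x109098  -- after the call at 0x109093 of __asan_store1_noabort | dgif_lib.c:413 ?
abbrev DGifGetImageHeader.ret30 : Word := 0x1090ae  -- after the call at 0x1090a9 of __asan_load8_noabort | dgif_lib.c:414 ?
abbrev DGifGetImageHeader.ret31 : Word := 0x1090c1  -- after the call at 0x1090bc of __asan_store1_noabort | dgif_lib.c:414 ?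
abbrev DGifGetImageHeader.ret32 : Word := 0x1090d7  -- after the call at 0x1090d2 of __asan_store4_noabort | dgif_lib.c:399 ?
abbrev DGifGetImageHeader.ret33 : Word := 0x1090ef  -- after the call at 0x1090ea of __asan_load8_noabort | dgif_lib.c:407 ?
abbrev DGifGetImageHeader.ret34 : Word := 0x1090f8  -- after the call at 0x1090f3 of GifFreeMapObject | dgif_lib.c:407 ?
abbrev DGifGetImageHeader.ret35 : Word := 0x109101  -- after the call at 0x1090fc of __asan_store4_noabort | dgif_lib.c:408 ?
abbrev DGifGetImageHeader.ret36 : Word := 0x109110  -- after the call at 0x10910b of __asan_store8_noabort | dgif_lib.c:409 ?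
abbrev DGifGetImageHeader.chk1 : Word := 0x108e4d  -- call __asan_load8_noabort; then mov r12,QWORD PTR [rbx+0x70] | dgif_lib.c:364 ?
abbrev DGifGetImageHeader.chk2 : Word := 0x108e59  -- call __asan_load4_noabort; then mov r13d,DWORD PTR [r12] | dgif_lib.c:366 ?
abbrev DGifGetImageHeader.chk3 : Word := 0x108e6c  -- call __asan_store4_noabort; then mov DWORD PTR [rbx+0x60],0x6f | dgif_lib.c:368 ?
abbrev DGifGetImageHeader.chk4 : Word := 0x108f16  -- call __asan_store1_noabort; then mov BYTE PTR [rbx+0x38],r14b | dgif_lib.c:385 ?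
abbrev DGifGetImageHeader.chk5 : Word := 0x108f23  -- call __asan_load8_noabort; then mov rdi,QWORD PTR [rbx+0x40] | dgif_lib.c:388 ?
abbrev DGifGetImageHeader.chk6 : Word := 0x108f3a  -- call __asan_store8_noabort; then mov QWORD PTR [rbx+0x40],0x0 | dgif_lib.c:390 ?
abbrev DGifGetImageHeader.chk7 : Word := 0x108f52  -- call __asan_load4_noabort; then movsxd r13,DWORD PTR [rbx+0x30] | dgif_lib.c:419 ?
abbrev DGifGetImageHeader.chk8 : Word := 0x108f5f  -- call __asan_load4_noabort; then movsxd rax,DWORD PTR [rbx+0x34] | dgif_lib.c:420 ?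
abbrev DGifGetImageHeader.chk9 : Word := 0x108f71  -- call __asan_store8_noabort; then mov QWORD PTR [r12+0x38],r13 | dgif_lib.c:418 ?
abbrev DGifGetImageHeader.chk10 : Word := 0x108f8f  -- call __asan_store4_noabort; then mov DWORD PTR [rbx+0x60],0x66 | dgif_lib.c:379 ?
abbrev DGifGetImageHeader.chk11 : Word := 0x108fa2  -- call __asan_load8_noabort; then mov rdi,QWORD PTR [rbx+0x40] | dgif_lib.c:380 ?
abbrev DGifGetImageHeader.chk12 : Word := 0x108fb3  -- call __asan_store8_noabort; then mov QWORD PTR [rbx+0x40],0x0 | dgif_lib.c:381 ?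
abbrev DGifGetImageHeader.chk13 : Word := 0x108fe6  -- call __asan_store8_noabort; then mov QWORD PTR [rbx+0x40],r13 | dgif_lib.c:396 ?
abbrev DGifGetImageHeader.chk14 : Word := 0x109005  -- call __asan_load4_noabort; then cmp r14d,DWORD PTR [r13+0x0] | dgif_lib.c:404 ?
abbrev DGifGetImageHeader.chk15 : Word := 0x109033  -- call __asan_load8_noabort; then mov r15,QWORD PTR [rbx+0x40] | dgif_lib.c:412 ?
abbrev DGifGetImageHeader.chk16 : Word := 0x109040  -- call __asan_load8_noabort; then mov eax,r14d | dgif_lib.c:412 ?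
abbrev DGifGetImageHeader.chk17 : Word := 0x109062  -- call __asan_store1_noabort; then movzx eax,BYTE PTR [rsp+0xf] | dgif_lib.c:412 ?
abbrev DGifGetImageHeader.chk18 : Word := 0x109077  -- call __asan_load8_noabort; then mov rax,r13 | dgif_lib.c:413 ?
abbrev DGifGetImageHeader.chk19 : Word := 0x109093  -- call __asan_store1_noabort; then movzx eax,BYTE PTR [rsp+0xf] | dgif_lib.c:413 ?
abbrev DGifGetImageHeader.chk20 : Word := 0x1090a9  -- call __asan_load8_noabort; then add r13,QWORD PTR [r15+0x10] | dgif_lib.c:414 ?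
abbrev DGifGetImageHeader.chk21 : Word := 0x1090bc  -- call __asan_store1_noabort; then mov BYTE PTR [r13+0x2],r15b | dgif_lib.c:414 ?
abbrev DGifGetImageHeader.chk22 : Word := 0x1090d2  -- call __asan_store4_noabort; then mov DWORD PTR [rbx+0x60],0x6d | dgif_lib.c:399 ?
abbrev DGifGetImageHeader.chk23 : Word := 0x1090ea  -- call __asan_load8_noabort; then mov rdi,QWORD PTR [rbx+0x40] | dgif_lib.c:407 ?
abbrev DGifGetImageHeader.chk24 : Word := 0x1090fc  -- call __asan_store4_noabort; then mov DWORD PTR [rbx+0x60],0x66 | dgif_lib.c:408 ?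
abbrev DGifGetImageHeader.chk25 : Word := 0x10910b  -- call __asan_store8_noabort; then mov QWORD PTR [rbx+0x40],0x0 | dgif_lib.c:409 ?

abbrev DGifGetImageDesc.entry : Word := 0x109460  -- dgif_lib.c:430 ?
abbrev DGifGetImageDesc.size : Nat := 472  -- bytes of code: 0x109460 .. 0x109638
abbrev DGifGetImageDesc.insns : Nat := 115  -- instructions
abbrev DGifGetImageDesc.ret1 : Word := 0x109476  -- after the call at 0x109471 of __asan_load8_noabort | dgif_lib.c:431 ?
abbrev DGifGetImageDesc.ret2 : Word := 0x109482  -- after the call at 0x10947d of __asan_load4_noabort | dgif_lib.c:434 ?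
abbrev DGifGetImageDesc.ret3 : Word := 0x109493  -- after the call at 0x10948e of __asan_store4_noabort | dgif_lib.c:436 ?
abbrev DGifGetImageDesc.ret4 : Word := 0x1094af  -- after the call at 0x1094aa of DGifGetImageHeader | dgif_lib.c:440 ?
abbrev DGifGetImageDesc.ret5 : Word := 0x1094be  -- after the call at 0x1094b9 of __asan_load8_noabort | dgif_lib.c:444 ?
abbrev DGifGetImageDesc.ret6 : Word := 0x1094d4  -- after the call at 0x1094cf of __asan_load4_noabort | dgif_lib.c:446 ?
abbrev DGifGetImageDesc.ret7 : Word := 0x1094ea  -- after the call at 0x1094e5 of openbsd_reallocarray | dgif_lib.c:445 ?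
abbrev DGifGetImageDesc.ret8 : Word := 0x1094ff  -- after the call at 0x1094fa of __asan_store8_noabort | dgif_lib.c:452 ?
abbrev DGifGetImageDesc.ret9 : Word := 0x109510  -- after the call at 0x10950b of __asan_load4_noabort | dgif_lib.c:461 ?
abbrev DGifGetImageDesc.ret10 : Word := 0x109535  -- after the call at 0x109530 of memcpy | dgif_lib.c:462 ?
abbrev DGifGetImageDesc.ret11 : Word := 0x10953e  -- after the call at 0x109539 of __asan_load8_noabort | dgif_lib.c:463 ?
abbrev DGifGetImageDesc.ret12 : Word := 0x109551  -- after the call at 0x10954c of __asan_load8_noabort | dgif_lib.c:466 ?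
abbrev DGifGetImageDesc.ret13 : Word := 0x10955e  -- after the call at 0x109559 of __asan_load4_noabort | dgif_lib.c:465 ?
abbrev DGifGetImageDesc.ret14 : Word := 0x10956a  -- after the call at 0x109565 of GifMakeMapObject | dgif_lib.c:465 ?
abbrev DGifGetImageDesc.ret15 : Word := 0x109576  -- after the call at 0x109571 of __asan_store8_noabort | dgif_lib.c:464 ?
abbrev DGifGetImageDesc.ret16 : Word := 0x10958c  -- after the call at 0x109587 of __asan_store8_noabort | dgif_lib.c:472 ?
abbrev DGifGetImageDesc.ret17 : Word := 0x10959d  -- after the call at 0x109598 of __asan_store4_noabort | dgif_lib.c:473 ?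
abbrev DGifGetImageDesc.ret18 : Word := 0x1095ad  -- after the call at 0x1095a8 of __asan_store8_noabort | dgif_lib.c:474 ?
abbrev DGifGetImageDesc.ret19 : Word := 0x1095be  -- after the call at 0x1095b9 of __asan_load4_noabort | dgif_lib.c:476 ?
abbrev DGifGetImageDesc.ret20 : Word := 0x1095da  -- after the call at 0x1095d5 of __asan_store4_noabort | dgif_lib.c:449 ?
abbrev DGifGetImageDesc.ret21 : Word := 0x1095f0  -- after the call at 0x1095eb of malloc | dgif_lib.c:455 ?
abbrev DGifGetImageDesc.ret22 : Word := 0x1095fc  -- after the call at 0x1095f7 of __asan_store8_noabort | dgif_lib.c:454 ?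
abbrev DGifGetImageDesc.ret23 : Word := 0x109612  -- after the call at 0x10960d of __asan_store4_noabort | dgif_lib.c:456 ?
abbrev DGifGetImageDesc.ret24 : Word := 0x109627  -- after the call at 0x109622 of __asan_store4_noabort | dgif_lib.c:468 ?
abbrev DGifGetImageDesc.chk1 : Word := 0x109471  -- call __asan_load8_noabort; then mov rbp,QWORD PTR [rbx+0x70] | dgif_lib.c:431 ?
abbrev DGifGetImageDesc.chk2 : Word := 0x10947d  -- call __asan_load4_noabort; then mov ebp,DWORD PTR [rbp+0x0] | dgif_lib.c:434 ?
abbrev DGifGetImageDesc.chk3 : Word := 0x10948e  -- call __asan_store4_noabort; then mov DWORD PTR [rbx+0x60],0x6f | dgif_lib.c:436 ?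
abbrev DGifGetImageDesc.chk4 : Word := 0x1094b9  -- call __asan_load8_noabort; then mov rbp,QWORD PTR [rbx+0x48] | dgif_lib.c:444 ?
abbrev DGifGetImageDesc.chk5 : Word := 0x1094cf  -- call __asan_load4_noabort; then mov eax,DWORD PTR [rbx+0x20] | dgif_lib.c:446 ?
abbrev DGifGetImageDesc.chk6 : Word := 0x1094fa  -- call __asan_store8_noabort; then mov QWORD PTR [rbx+0x48],rbp | dgif_lib.c:452 ?
abbrev DGifGetImageDesc.chk7 : Word := 0x10950b  -- call __asan_load4_noabort; then movsxd rdx,DWORD PTR [rbx+0x20] | dgif_lib.c:461 ?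
abbrev DGifGetImageDesc.chk8 : Word := 0x109539  -- call __asan_load8_noabort; then mov r12,QWORD PTR [rbx+0x40] | dgif_lib.c:463 ?
abbrev DGifGetImageDesc.chk9 : Word := 0x10954c  -- call __asan_load8_noabort; then mov r13,QWORD PTR [r12+0x10] | dgif_lib.c:466 ?
abbrev DGifGetImageDesc.chk10 : Word := 0x109559  -- call __asan_load4_noabort; then mov edi,DWORD PTR [r12] | dgif_lib.c:465 ?
abbrev DGifGetImageDesc.chk11 : Word := 0x109571  -- call __asan_store8_noabort; then mov QWORD PTR [rbp+0x18],r12 | dgif_lib.c:464 ?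
abbrev DGifGetImageDesc.chk12 : Word := 0x109587  -- call __asan_store8_noabort; then mov QWORD PTR [rbp+0x20],0x0 | dgif_lib.c:472 ?
abbrev DGifGetImageDesc.chk13 : Word := 0x109598  -- call __asan_store4_noabort; then mov DWORD PTR [rbp+0x28],0x0 | dgif_lib.c:473 ?
abbrev DGifGetImageDesc.chk14 : Word := 0x1095a8  -- call __asan_store8_noabort; then mov QWORD PTR [rbp+0x30],0x0 | dgif_lib.c:474 ?
abbrev DGifGetImageDesc.chk15 : Word := 0x1095b9  -- call __asan_load4_noabort; then mov eax,DWORD PTR [rbx+0x20] | dgif_lib.c:476 ?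
abbrev DGifGetImageDesc.chk16 : Word := 0x1095d5  -- call __asan_store4_noabort; then mov DWORD PTR [rbx+0x60],0x6d | dgif_lib.c:449 ?
abbrev DGifGetImageDesc.chk17 : Word := 0x1095f7  -- call __asan_store8_noabort; then mov QWORD PTR [rbx+0x48],rbp | dgif_lib.c:454 ?
abbrev DGifGetImageDesc.chk18 : Word := 0x10960d  -- call __asan_store4_noabort; then mov DWORD PTR [rbx+0x60],0x6d | dgif_lib.c:456 ?
abbrev DGifGetImageDesc.chk19 : Word := 0x109622  -- call __asan_store4_noabort; then mov DWORD PTR [rbx+0x60],0x6d | dgif_lib.c:468 ?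

abbrev DGifGetExtensionNext.entry : Word := 0x109820  -- dgif_lib.c:598 ?
abbrev DGifGetExtensionNext.size : Nat := 295  -- bytes of code: 0x109820 .. 0x109947
abbrev DGifGetExtensionNext.insns : Nat := 70  -- instructions
abbrev DGifGetExtensionNext.ret1 : Word := 0x109875  -- after the call at 0x109870 of __asan_load8_noabort | dgif_lib.c:600 ?
abbrev DGifGetExtensionNext.ret2 : Word := 0x10988b  -- after the call at 0x109886 of InternalRead | dgif_lib.c:603 ?
abbrev DGifGetExtensionNext.ret3 : Word := 0x109899  -- after the call at 0x109894 of __asan_store4_noabort | dgif_lib.c:604 ?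
abbrev DGifGetExtensionNext.ret4 : Word := 0x1098d9  -- after the call at 0x1098d4 of __asan_store8_noabort | dgif_lib.c:619 ?
abbrev DGifGetExtensionNext.ret5 : Word := 0x1098f4  -- after the call at 0x1098ef of __asan_store8_noabort | dgif_lib.c:610 ?
abbrev DGifGetExtensionNext.ret6 : Word := 0x109905  -- after the call at 0x109900 of __asan_store1_noabort | dgif_lib.c:611 ?
abbrev DGifGetExtensionNext.ret7 : Word := 0x10991d  -- after the call at 0x109918 of InternalRead | dgif_lib.c:614 ?
abbrev DGifGetExtensionNext.ret8 : Word := 0x109935  -- after the call at 0x109930 of __asan_store4_noabort | dgif_lib.c:615 ?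
abbrev DGifGetExtensionNext.chk1 : Word := 0x109870  -- call __asan_load8_noabort; then mov r15,QWORD PTR [rbx+0x70] | dgif_lib.c:600 ?
abbrev DGifGetExtensionNext.chk2 : Word := 0x109894  -- call __asan_store4_noabort; then mov DWORD PTR [rbx+0x60],0x66 | dgif_lib.c:604 ?
abbrev DGifGetExtensionNext.chk3 : Word := 0x1098d4  -- call __asan_store8_noabort; then mov QWORD PTR [r13+0x0],0x0 | dgif_lib.c:619 ?
abbrev DGifGetExtensionNext.chk4 : Word := 0x1098ef  -- call __asan_store8_noabort; then mov rax,QWORD PTR [rsp+0x8] | dgif_lib.c:610 ?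
abbrev DGifGetExtensionNext.chk5 : Word := 0x109900  -- call __asan_store1_noabort; then mov BYTE PTR [r15+0x58],r14b | dgif_lib.c:611 ?
abbrev DGifGetExtensionNext.chk6 : Word := 0x109930  -- call __asan_store4_noabort; then mov DWORD PTR [rbx+0x60],0x66 | dgif_lib.c:615 ?

abbrev DGifGetExtension.entry : Word := 0x109a80  -- dgif_lib.c:570 ?
abbrev DGifGetExtension.size : Nat := 231  -- bytes of code: 0x109a80 .. 0x109b67
abbrev DGifGetExtension.insns : Nat := 57  -- instructions
abbrev DGifGetExtension.ret1 : Word := 0x109ad3  -- after the call at 0x109ace of __asan_load8_noabort | dgif_lib.c:572 ?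
abbrev DGifGetExtension.ret2 : Word := 0x109adf  -- after the call at 0x109ada of __asan_load4_noabort | dgif_lib.c:575 ?
abbrev DGifGetExtension.ret3 : Word := 0x109af4  -- after the call at 0x109aef of __asan_store4_noabort | dgif_lib.c:577 ?
abbrev DGifGetExtension.ret4 : Word := 0x109b28  -- after the call at 0x109b23 of InternalRead | dgif_lib.c:582 ?
abbrev DGifGetExtension.ret5 : Word := 0x109b36  -- after the call at 0x109b31 of __asan_store4_noabort | dgif_lib.c:583 ?
abbrev DGifGetExtension.ret6 : Word := 0x109b53  -- after the call at 0x109b4e of __asan_store4_noabort | dgif_lib.c:586 ?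
abbrev DGifGetExtension.ret7 : Word := 0x109b62  -- after the call at 0x109b5d of DGifGetExtensionNext | dgif_lib.c:590 ?
abbrev DGifGetExtension.chk1 : Word := 0x109ace  -- call __asan_load8_noabort; then mov r12,QWORD PTR [rbx+0x70] | dgif_lib.c:572 ?
abbrev DGifGetExtension.chk2 : Word := 0x109ada  -- call __asan_load4_noabort; then mov eax,DWORD PTR [r12] | dgif_lib.c:575 ?
abbrev DGifGetExtension.chk3 : Word := 0x109aef  -- call __asan_store4_noabort; then mov DWORD PTR [rbx+0x60],0x6f | dgif_lib.c:577 ?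
abbrev DGifGetExtension.chk4 : Word := 0x109b31  -- call __asan_store4_noabort; then mov DWORD PTR [rbx+0x60],0x66 | dgif_lib.c:583 ?
abbrev DGifGetExtension.chk5 : Word := 0x109b4e  -- call __asan_store4_noabort; then mov DWORD PTR [r13+0x0],r12d | dgif_lib.c:586 ?

abbrev DGifCloseFile.entry : Word := 0x109c60  -- dgif_lib.c:683 ?
abbrev DGifCloseFile.size : Nat := 360  -- bytes of code: 0x109c60 .. 0x109dc8
abbrev DGifCloseFile.insns : Nat := 92  -- instructions
abbrev DGifCloseFile.ret1 : Word := 0x109c82  -- after the call at 0x109c7d of __asan_load8_noabort | dgif_lib.c:686 ?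
abbrev DGifCloseFile.ret2 : Word := 0x109c96  -- after the call at 0x109c91 of __asan_load8_noabort | dgif_lib.c:690 ?
abbrev DGifCloseFile.ret3 : Word := 0x109ca4  -- after the call at 0x109c9f of GifFreeMapObject | dgif_lib.c:691 ?
abbrev DGifCloseFile.ret4 : Word := 0x109cad  -- after the call at 0x109ca8 of __asan_store8_noabort | dgif_lib.c:692 ?
abbrev DGifCloseFile.ret5 : Word := 0x109cbe  -- after the call at 0x109cb9 of __asan_load8_noabort | dgif_lib.c:695 ?
abbrev DGifCloseFile.ret6 : Word := 0x109ccc  -- after the call at 0x109cc7 of GifFreeMapObject | dgif_lib.c:696 ?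
abbrev DGifCloseFile.ret7 : Word := 0x109cd5  -- after the call at 0x109cd0 of __asan_store8_noabort | dgif_lib.c:697 ?
abbrev DGifCloseFile.ret8 : Word := 0x109ce6  -- after the call at 0x109ce1 of __asan_load8_noabort | dgif_lib.c:700 ?
abbrev DGifCloseFile.ret9 : Word := 0x109cf5  -- after the call at 0x109cf0 of GifFreeSavedImages | dgif_lib.c:701 ?
abbrev DGifCloseFile.ret10 : Word := 0x109cfe  -- after the call at 0x109cf9 of __asan_store8_noabort | dgif_lib.c:702 ?
abbrev DGifCloseFile.ret11 : Word := 0x109d13  -- after the call at 0x109d0e of GifFreeExtensions | dgif_lib.c:705 ?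
abbrev DGifCloseFile.ret12 : Word := 0x109d1c  -- after the call at 0x109d17 of __asan_load8_noabort | dgif_lib.c:708 ?
abbrev DGifCloseFile.ret13 : Word := 0x109d28  -- after the call at 0x109d23 of __asan_load4_noabort | dgif_lib.c:710 ?
abbrev DGifCloseFile.ret14 : Word := 0x109d3b  -- after the call at 0x109d36 of __asan_load8_noabort | dgif_lib.c:720 ?
abbrev DGifCloseFile.ret15 : Word := 0x109d4c  -- after the call at 0x109d47 of free | dgif_lib.c:729 ?
abbrev DGifCloseFile.ret16 : Word := 0x109d54  -- after the call at 0x109d4f of free | dgif_lib.c:730 ?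
abbrev DGifCloseFile.ret17 : Word := 0x109d61  -- after the call at 0x109d5c of __asan_store4_noabort | dgif_lib.c:732 ?
abbrev DGifCloseFile.ret18 : Word := 0x109d89  -- after the call at 0x109d84 of __asan_store4_noabort | dgif_lib.c:713 ?
abbrev DGifCloseFile.ret19 : Word := 0x109d99  -- after the call at 0x109d94 of free | dgif_lib.c:715 ?
abbrev DGifCloseFile.ret20 : Word := 0x109da1  -- after the call at 0x109d9c of free | dgif_lib.c:716 ?
abbrev DGifCloseFile.ret21 : Word := 0x109da8  -- after the call at 0x109da3 of __asan_handle_no_return | dgif_lib.c:720 ?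
abbrev DGifCloseFile.ret22 : Word := 0x109db0  -- after the call at 0x109dab of fclose | dgif_lib.c:720 ?
abbrev DGifCloseFile.chk1 : Word := 0x109c7d  -- call __asan_load8_noabort; then cmp QWORD PTR [rbx+0x70],0x0 | dgif_lib.c:686 ?
abbrev DGifCloseFile.chk2 : Word := 0x109c91  -- call __asan_load8_noabort; then mov rdi,QWORD PTR [rbx+0x40] | dgif_lib.c:690 ?
abbrev DGifCloseFile.chk3 : Word := 0x109ca8  -- call __asan_store8_noabort; then mov QWORD PTR [rbx+0x40],0x0 | dgif_lib.c:692 ?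
abbrev DGifCloseFile.chk4 : Word := 0x109cb9  -- call __asan_load8_noabort; then mov rdi,QWORD PTR [rbx+0x18] | dgif_lib.c:695 ?
abbrev DGifCloseFile.chk5 : Word := 0x109cd0  -- call __asan_store8_noabort; then mov QWORD PTR [rbx+0x18],0x0 | dgif_lib.c:697 ?
abbrev DGifCloseFile.chk6 : Word := 0x109ce1  -- call __asan_load8_noabort; then cmp QWORD PTR [rbx+0x48],0x0 | dgif_lib.c:700 ?
abbrev DGifCloseFile.chk7 : Word := 0x109cf9  -- call __asan_store8_noabort; then mov QWORD PTR [rbx+0x48],0x0 | dgif_lib.c:702 ?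
abbrev DGifCloseFile.chk8 : Word := 0x109d17  -- call __asan_load8_noabort; then mov r13,QWORD PTR [rbx+0x70] | dgif_lib.c:708 ?
abbrev DGifCloseFile.chk9 : Word := 0x109d23  -- call __asan_load4_noabort; then mov r12d,DWORD PTR [r13+0x0] | dgif_lib.c:710 ?
abbrev DGifCloseFile.chk10 : Word := 0x109d36  -- call __asan_load8_noabort; then mov r12,QWORD PTR [r13+0x40] | dgif_lib.c:720 ?
abbrev DGifCloseFile.chk11 : Word := 0x109d5c  -- call __asan_store4_noabort; then mov DWORD PTR [rbp+0x0],0x0 | dgif_lib.c:732 ?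
abbrev DGifCloseFile.chk12 : Word := 0x109d84  -- call __asan_store4_noabort; then mov DWORD PTR [rbp+0x0],0x6f | dgif_lib.c:713 ?

abbrev DGifGetCodeNext.entry : Word := 0x109f40  -- dgif_lib.c:779 ?
abbrev DGifGetCodeNext.size : Nat := 326  -- bytes of code: 0x109f40 .. 0x10a086
abbrev DGifGetCodeNext.insns : Nat := 76  -- instructions
abbrev DGifGetCodeNext.ret1 : Word := 0x109f95  -- after the call at 0x109f90 of __asan_load8_noabort | dgif_lib.c:781 ?
abbrev DGifGetCodeNext.ret2 : Word := 0x109fab  -- after the call at 0x109fa6 of InternalRead | dgif_lib.c:785 ?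
abbrev DGifGetCodeNext.ret3 : Word := 0x109fb9  -- after the call at 0x109fb4 of __asan_store4_noabort | dgif_lib.c:786 ?
abbrev DGifGetCodeNext.ret4 : Word := 0x109ff9  -- after the call at 0x109ff4 of __asan_store8_noabort | dgif_lib.c:801 ?
abbrev DGifGetCodeNext.ret5 : Word := 0x10a00a  -- after the call at 0x10a005 of __asan_store1_noabort | dgif_lib.c:802 ?
abbrev DGifGetCodeNext.ret6 : Word := 0x10a018  -- after the call at 0x10a013 of __asan_store8_noabort | dgif_lib.c:803 ?
abbrev DGifGetCodeNext.ret7 : Word := 0x10a033  -- after the call at 0x10a02e of __asan_store8_noabort | dgif_lib.c:792 ?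
abbrev DGifGetCodeNext.ret8 : Word := 0x10a044  -- after the call at 0x10a03f of __asan_store1_noabort | dgif_lib.c:793 ?
abbrev DGifGetCodeNext.ret9 : Word := 0x10a05c  -- after the call at 0x10a057 of InternalRead | dgif_lib.c:796 ?
abbrev DGifGetCodeNext.ret10 : Word := 0x10a074  -- after the call at 0x10a06f of __asan_store4_noabort | dgif_lib.c:797 ?
abbrev DGifGetCodeNext.chk1 : Word := 0x109f90  -- call __asan_load8_noabort; then mov r14,QWORD PTR [rbx+0x70] | dgif_lib.c:781 ?
abbrev DGifGetCodeNext.chk2 : Word := 0x109fb4  -- call __asan_store4_noabort; then mov DWORD PTR [rbx+0x60],0x66 | dgif_lib.c:786 ?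
abbrev DGifGetCodeNext.chk3 : Word := 0x109ff4  -- call __asan_store8_noabort; then mov QWORD PTR [r13+0x0],0x0 | dgif_lib.c:801 ?
abbrev DGifGetCodeNext.chk4 : Word := 0x10a005  -- call __asan_store1_noabort; then mov BYTE PTR [r14+0x58],0x0 | dgif_lib.c:802 ?
abbrev DGifGetCodeNext.chk5 : Word := 0x10a013  -- call __asan_store8_noabort; then mov QWORD PTR [r14+0x38],0x0 | dgif_lib.c:803 ?
abbrev DGifGetCodeNext.chk6 : Word := 0x10a02e  -- call __asan_store8_noabort; then mov rax,QWORD PTR [rsp+0x8] | dgif_lib.c:792 ?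
abbrev DGifGetCodeNext.chk7 : Word := 0x10a03f  -- call __asan_store1_noabort; then mov BYTE PTR [r14+0x58],r15b | dgif_lib.c:793 ?
abbrev DGifGetCodeNext.chk8 : Word := 0x10a06f  -- call __asan_store4_noabort; then mov DWORD PTR [rbx+0x60],0x66 | dgif_lib.c:797 ?

abbrev DGifGetLine.entry : Word := 0x10a1e0  -- dgif_lib.c:484 ?
abbrev DGifGetLine.size : Nat := 308  -- bytes of code: 0x10a1e0 .. 0x10a314
abbrev DGifGetLine.insns : Nat := 81  -- instructions
abbrev DGifGetLine.loop1 : Word := 0x10a2ea  -- loop head: lea rsi,[rsp+0x20] | dgif_lib.c:512 ?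
abbrev DGifGetLine.ret1 : Word := 0x10a239  -- after the call at 0x10a234 of __asan_load8_noabort | dgif_lib.c:486 ?
abbrev DGifGetLine.ret2 : Word := 0x10a245  -- after the call at 0x10a240 of __asan_load4_noabort | dgif_lib.c:488 ?
abbrev DGifGetLine.ret3 : Word := 0x10a25b  -- after the call at 0x10a256 of __asan_load4_noabort | dgif_lib.c:495 ?
abbrev DGifGetLine.ret4 : Word := 0x10a26d  -- after the call at 0x10a268 of __asan_load8_noabort | dgif_lib.c:498 ?
abbrev DGifGetLine.ret5 : Word := 0x10a282  -- after the call at 0x10a27d of __asan_store4_noabort | dgif_lib.c:499 ?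
abbrev DGifGetLine.ret6 : Word := 0x10a2b4  -- after the call at 0x10a2af of __asan_store4_noabort | dgif_lib.c:490 ?
abbrev DGifGetLine.ret7 : Word := 0x10a2d2  -- after the call at 0x10a2cd of DGifDecompressLine | dgif_lib.c:504 ?
abbrev DGifGetLine.ret8 : Word := 0x10a2e3  -- after the call at 0x10a2de of __asan_load8_noabort | dgif_lib.c:505 ?
abbrev DGifGetLine.ret9 : Word := 0x10a2f7  -- after the call at 0x10a2f2 of DGifGetCodeNext | dgif_lib.c:512 ?
abbrev DGifGetLine.chk1 : Word := 0x10a234  -- call __asan_load8_noabort; then mov r14,QWORD PTR [rbp+0x70] | dgif_lib.c:486 ?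
abbrev DGifGetLine.chk2 : Word := 0x10a240  -- call __asan_load4_noabort; then mov ebx,DWORD PTR [r14] | dgif_lib.c:488 ?
abbrev DGifGetLine.chk3 : Word := 0x10a256  -- call __asan_load4_noabort; then mov r13d,DWORD PTR [rbp+0x30] | dgif_lib.c:495 ?
abbrev DGifGetLine.chk4 : Word := 0x10a268  -- call __asan_load8_noabort; then mov rax,QWORD PTR [r14+0x38] | dgif_lib.c:498 ?
abbrev DGifGetLine.chk5 : Word := 0x10a27d  -- call __asan_store4_noabort; then mov DWORD PTR [rbp+0x60],0x6c | dgif_lib.c:499 ?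
abbrev DGifGetLine.chk6 : Word := 0x10a2af  -- call __asan_store4_noabort; then mov DWORD PTR [rbp+0x60],0x6f | dgif_lib.c:490 ?
abbrev DGifGetLine.chk7 : Word := 0x10a2de  -- call __asan_load8_noabort; then cmp QWORD PTR [r14+0x38],0x0 | dgif_lib.c:505 ?

abbrev DGifDecreaseImageCounter.entry : Word := 0x10a460  -- dgif_lib.c:1156 ?
abbrev DGifDecreaseImageCounter.size : Nat := 271  -- bytes of code: 0x10a460 .. 0x10a56f
abbrev DGifDecreaseImageCounter.insns : Nat := 70  -- instructions
abbrev DGifDecreaseImageCounter.ret1 : Word := 0x10a472  -- after the call at 0x10a46d of __asan_load4_noabort | dgif_lib.c:1157 ?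
abbrev DGifDecreaseImageCounter.ret2 : Word := 0x10a484  -- after the call at 0x10a47f of __asan_load8_noabort | dgif_lib.c:1158 ?
abbrev DGifDecreaseImageCounter.ret3 : Word := 0x10a4a3  -- after the call at 0x10a49e of __asan_load8_noabort | dgif_lib.c:1158 ?
abbrev DGifDecreaseImageCounter.ret4 : Word := 0x10a4b1  -- after the call at 0x10a4ac of free | dgif_lib.c:1159 ?
abbrev DGifDecreaseImageCounter.ret5 : Word := 0x10a4ba  -- after the call at 0x10a4b5 of __asan_load8_noabort | dgif_lib.c:1161 ?
abbrev DGifDecreaseImageCounter.ret6 : Word := 0x10a4c7  -- after the call at 0x10a4c2 of __asan_load4_noabort | dgif_lib.c:1161 ?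
abbrev DGifDecreaseImageCounter.ret7 : Word := 0x10a4e4  -- after the call at 0x10a4df of __asan_load8_noabort | dgif_lib.c:1161 ?
abbrev DGifDecreaseImageCounter.ret8 : Word := 0x10a4f2  -- after the call at 0x10a4ed of GifFreeMapObject | dgif_lib.c:1162 ?
abbrev DGifDecreaseImageCounter.ret9 : Word := 0x10a4fb  -- after the call at 0x10a4f6 of __asan_load4_noabort | dgif_lib.c:1166 ?
abbrev DGifDecreaseImageCounter.ret10 : Word := 0x10a50b  -- after the call at 0x10a506 of __asan_load8_noabort | dgif_lib.c:1175 ?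
abbrev DGifDecreaseImageCounter.ret11 : Word := 0x10a51c  -- after the call at 0x10a517 of openbsd_reallocarray | dgif_lib.c:1174 ?
abbrev DGifDecreaseImageCounter.ret12 : Word := 0x10a52d  -- after the call at 0x10a528 of __asan_store8_noabort | dgif_lib.c:1177 ?
abbrev DGifDecreaseImageCounter.ret13 : Word := 0x10a544  -- after the call at 0x10a53f of __asan_load8_noabort | dgif_lib.c:1167 ?
abbrev DGifDecreaseImageCounter.ret14 : Word := 0x10a54d  -- after the call at 0x10a548 of free | dgif_lib.c:1167 ?
abbrev DGifDecreaseImageCounter.ret15 : Word := 0x10a555  -- after the call at 0x10a550 of __asan_store8_noabort | dgif_lib.c:1168 ?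
abbrev DGifDecreaseImageCounter.ret16 : Word := 0x10a566  -- after the call at 0x10a561 of __asan_store4_noabort | dgif_lib.c:1169 ?
abbrev DGifDecreaseImageCounter.chk1 : Word := 0x10a46d  -- call __asan_load4_noabort; then mov eax,DWORD PTR [rbx+0x20] | dgif_lib.c:1157 ?
abbrev DGifDecreaseImageCounter.chk2 : Word := 0x10a47f  -- call __asan_load8_noabort; then movsxd rax,ebp | dgif_lib.c:1158 ?
abbrev DGifDecreaseImageCounter.chk3 : Word := 0x10a49e  -- call __asan_load8_noabort; then mov rdi,QWORD PTR [rbp+0x20] | dgif_lib.c:1158 ?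
abbrev DGifDecreaseImageCounter.chk4 : Word := 0x10a4b5  -- call __asan_load8_noabort; then mov rbp,QWORD PTR [rbx+0x48] | dgif_lib.c:1161 ?
abbrev DGifDecreaseImageCounter.chk5 : Word := 0x10a4c2  -- call __asan_load4_noabort; then movsxd rdx,DWORD PTR [rbx+0x20] | dgif_lib.c:1161 ?
abbrev DGifDecreaseImageCounter.chk6 : Word := 0x10a4df  -- call __asan_load8_noabort; then mov rdi,QWORD PTR [rbp+0x18] | dgif_lib.c:1161 ?
abbrev DGifDecreaseImageCounter.chk7 : Word := 0x10a4f6  -- call __asan_load4_noabort; then mov ebp,DWORD PTR [rbx+0x20] | dgif_lib.c:1166 ?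
abbrev DGifDecreaseImageCounter.chk8 : Word := 0x10a506  -- call __asan_load8_noabort; then mov rdi,QWORD PTR [rbx+0x48] | dgif_lib.c:1175 ?
abbrev DGifDecreaseImageCounter.chk9 : Word := 0x10a528  -- call __asan_store8_noabort; then mov QWORD PTR [rbx+0x48],rbp | dgif_lib.c:1177 ?
abbrev DGifDecreaseImageCounter.chk10 : Word := 0x10a53f  -- call __asan_load8_noabort; then mov rdi,QWORD PTR [rbx+0x48] | dgif_lib.c:1167 ?
abbrev DGifDecreaseImageCounter.chk11 : Word := 0x10a550  -- call __asan_store8_noabort; then mov QWORD PTR [rbx+0x48],0x0 | dgif_lib.c:1168 ?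
abbrev DGifDecreaseImageCounter.chk12 : Word := 0x10a561  -- call __asan_store4_noabort; then mov DWORD PTR [rbx+0x20],0x0 | dgif_lib.c:1169 ?

abbrev DGifSlurp.entry : Word := 0x10a680  -- dgif_lib.c:1186 ?
abbrev DGifSlurp.size : Nat := 892  -- bytes of code: 0x10a680 .. 0x10a9fc
abbrev DGifSlurp.insns : Nat := 213  -- instructions
abbrev DGifSlurp.loop1 : Word := 0x10a82a  -- loop head: lea rsi,[rsp+0x20] | dgif_lib.c:1197 ?
abbrev DGifSlurp.loop2 : Word := 0x10a8a2  -- loop head: lea rsi,[rsp+0x40] | dgif_lib.c:1291 ?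
abbrev DGifSlurp.loop3 : Word := 0x10a948  -- loop head: cmp r15d,0x3 | dgif_lib.c:1241 ?
abbrev DGifSlurp.loop4 : Word := 0x10a96a  -- loop head: lea rdi,[r12+0xc] | dgif_lib.c:1243 ?
abbrev DGifSlurp.ret1 : Word := 0x10a6dc  -- after the call at 0x10a6d7 of __asan_store8_noabort | dgif_lib.c:1193 ?
abbrev DGifSlurp.ret2 : Word := 0x10a6ed  -- after the call at 0x10a6e8 of __asan_store4_noabort | dgif_lib.c:1194 ?
abbrev DGifSlurp.ret3 : Word := 0x10a701  -- after the call at 0x10a6fc of DGifGetImageDesc | dgif_lib.c:1203 ?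
abbrev DGifSlurp.ret4 : Word := 0x10a714  -- after the call at 0x10a70f of __asan_load8_noabort | dgif_lib.c:1207 ?
abbrev DGifSlurp.ret5 : Word := 0x10a721  -- after the call at 0x10a71c of __asan_load4_noabort | dgif_lib.c:1207 ?
abbrev DGifSlurp.ret6 : Word := 0x10a73f  -- after the call at 0x10a73a of __asan_load4_noabort | dgif_lib.c:1209 ?
abbrev DGifSlurp.ret7 : Word := 0x10a756  -- after the call at 0x10a751 of __asan_load4_noabort | dgif_lib.c:1210 ?
abbrev DGifSlurp.ret8 : Word := 0x10a78c  -- after the call at 0x10a787 of openbsd_reallocarray | dgif_lib.c:1222 ?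
abbrev DGifSlurp.ret9 : Word := 0x10a799  -- after the call at 0x10a794 of __asan_store8_noabort | dgif_lib.c:1222 ?
abbrev DGifSlurp.ret10 : Word := 0x10a7b1  -- after the call at 0x10a7ac of __asan_load1_noabort | dgif_lib.c:1230 ?
abbrev DGifSlurp.ret11 : Word := 0x10a7ca  -- after the call at 0x10a7c5 of DGifGetLine | dgif_lib.c:1259 ?
abbrev DGifSlurp.ret12 : Word := 0x10a7dd  -- after the call at 0x10a7d8 of __asan_load8_noabort | dgif_lib.c:1266 ?
abbrev DGifSlurp.ret13 : Word := 0x10a7f0  -- after the call at 0x10a7eb of __asan_store8_noabort | dgif_lib.c:1267 ?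
abbrev DGifSlurp.ret14 : Word := 0x10a7fe  -- after the call at 0x10a7f9 of __asan_load4_noabort | dgif_lib.c:1269 ?
abbrev DGifSlurp.ret15 : Word := 0x10a80b  -- after the call at 0x10a806 of __asan_store4_noabort | dgif_lib.c:1268 ?
abbrev DGifSlurp.ret16 : Word := 0x10a837  -- after the call at 0x10a832 of DGifGetRecordType | dgif_lib.c:1197 ?
abbrev DGifSlurp.ret17 : Word := 0x10a869  -- after the call at 0x10a864 of DGifGetExtension | dgif_lib.c:1277 ?
abbrev DGifSlurp.ret18 : Word := 0x10a885  -- after the call at 0x10a880 of __asan_load1_noabort | dgif_lib.c:1286 ?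
abbrev DGifSlurp.ret19 : Word := 0x10a89c  -- after the call at 0x10a897 of GifAddExtensionBlock | dgif_lib.c:1283 ?
abbrev DGifSlurp.ret20 : Word := 0x10a8af  -- after the call at 0x10a8aa of DGifGetExtensionNext | dgif_lib.c:1291 ?
abbrev DGifSlurp.ret21 : Word := 0x10a8cf  -- after the call at 0x10a8ca of __asan_load1_noabort | dgif_lib.c:1302 ?
abbrev DGifSlurp.ret22 : Word := 0x10a8e7  -- after the call at 0x10a8e2 of GifAddExtensionBlock | dgif_lib.c:1299 ?
abbrev DGifSlurp.ret23 : Word := 0x10a91c  -- after the call at 0x10a917 of DGifDecreaseImageCounter | dgif_lib.c:1213 ?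
abbrev DGifSlurp.ret24 : Word := 0x10a92b  -- after the call at 0x10a926 of DGifDecreaseImageCounter | dgif_lib.c:1226 ?
abbrev DGifSlurp.ret25 : Word := 0x10a93a  -- after the call at 0x10a935 of DGifDecreaseImageCounter | dgif_lib.c:1252 ?
abbrev DGifSlurp.ret26 : Word := 0x10a962  -- after the call at 0x10a95d of __asan_load4_noabort | dgif_lib.c:1242 ?
abbrev DGifSlurp.ret27 : Word := 0x10a974  -- after the call at 0x10a96f of __asan_load4_noabort | dgif_lib.c:1243 ?
abbrev DGifSlurp.ret28 : Word := 0x10a985  -- after the call at 0x10a980 of __asan_load4_noabort | dgif_lib.c:1245 ?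
abbrev DGifSlurp.ret29 : Word := 0x10a9a0  -- after the call at 0x10a99b of DGifGetLine | dgif_lib.c:1245 ?
abbrev DGifSlurp.ret30 : Word := 0x10a9b6  -- after the call at 0x10a9b1 of __asan_load4_noabort | dgif_lib.c:1244 ?
abbrev DGifSlurp.ret31 : Word := 0x10a9c8  -- after the call at 0x10a9c3 of DGifDecreaseImageCounter | dgif_lib.c:1261 ?
abbrev DGifSlurp.ret32 : Word := 0x10a9d6  -- after the call at 0x10a9d1 of __asan_load4_noabort | dgif_lib.c:1318 ?
abbrev DGifSlurp.ret33 : Word := 0x10a9f0  -- after the call at 0x10a9eb of __asan_store4_noabort | dgif_lib.c:1319 ?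
abbrev DGifSlurp.chk1 : Word := 0x10a6d7  -- call __asan_store8_noabort; then mov QWORD PTR [rbp+0x58],0x0 | dgif_lib.c:1193 ?
abbrev DGifSlurp.chk2 : Word := 0x10a6e8  -- call __asan_store4_noabort; then mov DWORD PTR [rbp+0x50],0x0 | dgif_lib.c:1194 ?
abbrev DGifSlurp.chk3 : Word := 0x10a70f  -- call __asan_load8_noabort; then mov rbx,QWORD PTR [rbp+0x48] | dgif_lib.c:1207 ?
abbrev DGifSlurp.chk4 : Word := 0x10a71c  -- call __asan_load4_noabort; then movsxd rdx,DWORD PTR [rbp+0x20] | dgif_lib.c:1207 ?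
abbrev DGifSlurp.chk5 : Word := 0x10a73a  -- call __asan_load4_noabort; then mov ebx,DWORD PTR [r12+0x8] | dgif_lib.c:1209 ?
abbrev DGifSlurp.chk6 : Word := 0x10a751  -- call __asan_load4_noabort; then mov ecx,DWORD PTR [r12+0xc] | dgif_lib.c:1210 ?
abbrev DGifSlurp.chk7 : Word := 0x10a794  -- call __asan_store8_noabort; then mov QWORD PTR [r12+0x20],r13 | dgif_lib.c:1222 ?
abbrev DGifSlurp.chk8 : Word := 0x10a7ac  -- call __asan_load1_noabort; then cmp BYTE PTR [r12+0x10],0x0 | dgif_lib.c:1230 ?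
abbrev DGifSlurp.chk9 : Word := 0x10a7d8  -- call __asan_load8_noabort; then mov rbx,QWORD PTR [rbp+0x58] | dgif_lib.c:1266 ?
abbrev DGifSlurp.chk10 : Word := 0x10a7eb  -- call __asan_store8_noabort; then mov QWORD PTR [r12+0x30],rbx | dgif_lib.c:1267 ?
abbrev DGifSlurp.chk11 : Word := 0x10a7f9  -- call __asan_load4_noabort; then mov ebx,DWORD PTR [rbp+0x50] | dgif_lib.c:1269 ?
abbrev DGifSlurp.chk12 : Word := 0x10a806  -- call __asan_store4_noabort; then mov DWORD PTR [r12+0x28],ebx | dgif_lib.c:1268 ?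
abbrev DGifSlurp.chk13 : Word := 0x10a880  -- call __asan_load1_noabort; then movzx ecx,BYTE PTR [rbx] | dgif_lib.c:1286 ?
abbrev DGifSlurp.chk14 : Word := 0x10a8ca  -- call __asan_load1_noabort; then movzx ecx,BYTE PTR [rbx] | dgif_lib.c:1302 ?
abbrev DGifSlurp.chk15 : Word := 0x10a95d  -- call __asan_load4_noabort; then mov r13d,DWORD PTR [rbx*4+0x141340] | dgif_lib.c:1242 ?
abbrev DGifSlurp.chk16 : Word := 0x10a96f  -- call __asan_load4_noabort; then cmp DWORD PTR [r12+0xc],r13d | dgif_lib.c:1243 ?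
abbrev DGifSlurp.chk17 : Word := 0x10a980  -- call __asan_load4_noabort; then mov edx,DWORD PTR [r12+0x8] | dgif_lib.c:1245 ?
abbrev DGifSlurp.chk18 : Word := 0x10a9b1  -- call __asan_load4_noabort; then add r13d,DWORD PTR [rbx*4+0x141300] | dgif_lib.c:1244 ?
abbrev DGifSlurp.chk19 : Word := 0x10a9d1  -- call __asan_load4_noabort; then mov ebx,DWORD PTR [rbp+0x20] | dgif_lib.c:1318 ?
abbrev DGifSlurp.chk20 : Word := 0x10a9eb  -- call __asan_store4_noabort; then mov DWORD PTR [rbp+0x60],0x69 | dgif_lib.c:1319 ?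

abbrev gif_decode.entry : Word := 0x10ad80  -- gif_driver.c:180 ?
abbrev gif_decode.size : Nat := 698  -- bytes of code: 0x10ad80 .. 0x10b03a
abbrev gif_decode.insns : Nat := 149  -- instructions
abbrev gif_decode.ret1 : Word := 0x10adea  -- after the call at 0x10ade5 of __asan_store4_noabort | gif_driver.c:185 ?
abbrev gif_decode.ret2 : Word := 0x10adf9  -- after the call at 0x10adf4 of __asan_store4_noabort | gif_driver.c:186 ?
abbrev gif_decode.ret3 : Word := 0x10ae09  -- after the call at 0x10ae04 of __asan_store4_noabort | gif_driver.c:187 ?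
abbrev gif_decode.ret4 : Word := 0x10ae19  -- after the call at 0x10ae14 of __asan_store4_noabort | gif_driver.c:188 ?
abbrev gif_decode.ret5 : Word := 0x10ae29  -- after the call at 0x10ae24 of __asan_store4_noabort | gif_driver.c:189 ?
abbrev gif_decode.ret6 : Word := 0x10ae39  -- after the call at 0x10ae34 of __asan_store4_noabort | gif_driver.c:190 ?
abbrev gif_decode.ret7 : Word := 0x10ae49  -- after the call at 0x10ae44 of __asan_store4_noabort | gif_driver.c:191 ?
abbrev gif_decode.ret8 : Word := 0x10ae59  -- after the call at 0x10ae54 of __asan_store4_noabort | gif_driver.c:192 ?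
abbrev gif_decode.ret9 : Word := 0x10ae69  -- after the call at 0x10ae64 of __asan_store4_noabort | gif_driver.c:193 ?
abbrev gif_decode.ret10 : Word := 0x10ae79  -- after the call at 0x10ae74 of __asan_store4_noabort | gif_driver.c:194 ?
abbrev gif_decode.ret11 : Word := 0x10ae89  -- after the call at 0x10ae84 of __asan_store8_noabort | gif_driver.c:195 ?
abbrev gif_decode.ret12 : Word := 0x10ae9a  -- after the call at 0x10ae95 of __asan_store8_noabort | gif_driver.c:196 ?
abbrev gif_decode.ret13 : Word := 0x10aeab  -- after the call at 0x10aea6 of __asan_store8_noabort | gif_driver.c:197 ?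
abbrev gif_decode.ret14 : Word := 0x10aed4  -- after the call at 0x10aecf of DGifOpen | gif_driver.c:202 ?
abbrev gif_decode.ret15 : Word := 0x10aee8  -- after the call at 0x10aee3 of DGifSlurp | gif_driver.c:209 ?
abbrev gif_decode.ret16 : Word := 0x10aef4  -- after the call at 0x10aeef of __asan_store4_noabort | gif_driver.c:209 ?
abbrev gif_decode.ret17 : Word := 0x10af0a  -- after the call at 0x10af05 of __asan_store4_noabort | gif_driver.c:213 ?
abbrev gif_decode.ret18 : Word := 0x10af19  -- after the call at 0x10af14 of __asan_load4_noabort | gif_driver.c:215 ?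
abbrev gif_decode.ret19 : Word := 0x10af26  -- after the call at 0x10af21 of __asan_store4_noabort | gif_driver.c:215 ?
abbrev gif_decode.ret20 : Word := 0x10af33  -- after the call at 0x10af2e of __asan_load4_noabort | gif_driver.c:216 ?
abbrev gif_decode.ret21 : Word := 0x10af40  -- after the call at 0x10af3b of __asan_store4_noabort | gif_driver.c:216 ?
abbrev gif_decode.ret22 : Word := 0x10af4c  -- after the call at 0x10af47 of __asan_load4_noabort | gif_driver.c:217 ?
abbrev gif_decode.ret23 : Word := 0x10af59  -- after the call at 0x10af54 of __asan_store4_noabort | gif_driver.c:217 ?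
abbrev gif_decode.ret24 : Word := 0x10af66  -- after the call at 0x10af61 of __asan_load4_noabort | gif_driver.c:218 ?
abbrev gif_decode.ret25 : Word := 0x10af73  -- after the call at 0x10af6e of __asan_store4_noabort | gif_driver.c:218 ?
abbrev gif_decode.ret26 : Word := 0x10af83  -- after the call at 0x10af7e of digest_file | gif_driver.c:220 ?
abbrev gif_decode.ret27 : Word := 0x10af8f  -- after the call at 0x10af8a of __asan_store8_noabort | gif_driver.c:220 ?
abbrev gif_decode.ret28 : Word := 0x10afa8  -- after the call at 0x10afa3 of DGifCloseFile | gif_driver.c:224 ?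
abbrev gif_decode.ret29 : Word := 0x10afb3  -- after the call at 0x10afae of __asan_store4_noabort | gif_driver.c:224 ?
abbrev gif_decode.ret30 : Word := 0x10afc3  -- after the call at 0x10afbe of __asan_store4_noabort | gif_driver.c:225 ?
abbrev gif_decode.ret31 : Word := 0x10afd7  -- after the call at 0x10afd2 of __asan_store8_noabort | gif_driver.c:226 ?
abbrev gif_decode.ret32 : Word := 0x10b00d  -- after the call at 0x10b008 of __asan_store4_noabort | gif_driver.c:204 ?
abbrev gif_decode.ret33 : Word := 0x10b021  -- after the call at 0x10b01c of __asan_store8_noabort | gif_driver.c:205 ?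
abbrev gif_decode.ret34 : Word := 0x10b02f  -- after the call at 0x10b02a of __asan_store4_noabort | gif_driver.c:211 ?
abbrev gif_decode.chk1 : Word := 0x10ade5  -- call __asan_store4_noabort; then mov DWORD PTR [rbx],0x1 | gif_driver.c:185 ?
abbrev gif_decode.chk2 : Word := 0x10adf4  -- call __asan_store4_noabort; then mov DWORD PTR [rbx+0x4],0x0 | gif_driver.c:186 ?
abbrev gif_decode.chk3 : Word := 0x10ae04  -- call __asan_store4_noabort; then mov DWORD PTR [rbx+0x8],0xffffffff | gif_driver.c:187 ?
abbrev gif_decode.chk4 : Word := 0x10ae14  -- call __asan_store4_noabort; then mov DWORD PTR [rbx+0xc],0x0 | gif_driver.c:188 ?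
abbrev gif_decode.chk5 : Word := 0x10ae24  -- call __asan_store4_noabort; then mov DWORD PTR [rbx+0x10],0xffffffff | gif_driver.c:189 ?
abbrev gif_decode.chk6 : Word := 0x10ae34  -- call __asan_store4_noabort; then mov DWORD PTR [rbx+0x14],0x0 | gif_driver.c:190 ?
abbrev gif_decode.chk7 : Word := 0x10ae44  -- call __asan_store4_noabort; then mov DWORD PTR [rbx+0x18],0x0 | gif_driver.c:191 ?
abbrev gif_decode.chk8 : Word := 0x10ae54  -- call __asan_store4_noabort; then mov DWORD PTR [rbx+0x1c],0x0 | gif_driver.c:192 ?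
abbrev gif_decode.chk9 : Word := 0x10ae64  -- call __asan_store4_noabort; then mov DWORD PTR [rbx+0x20],0x0 | gif_driver.c:193 ?
abbrev gif_decode.chk10 : Word := 0x10ae74  -- call __asan_store4_noabort; then mov DWORD PTR [rbx+0x24],0x0 | gif_driver.c:194 ?
abbrev gif_decode.chk11 : Word := 0x10ae84  -- call __asan_store8_noabort; then mov QWORD PTR [rbx+0x28],0x0 | gif_driver.c:195 ?
abbrev gif_decode.chk12 : Word := 0x10ae95  -- call __asan_store8_noabort; then mov QWORD PTR [rbx+0x30],0x0 | gif_driver.c:196 ?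
abbrev gif_decode.chk13 : Word := 0x10aea6  -- call __asan_store8_noabort; then mov QWORD PTR [rbx+0x38],0x0 | gif_driver.c:197 ?
abbrev gif_decode.chk14 : Word := 0x10aeef  -- call __asan_store4_noabort; then mov DWORD PTR [rbx+0x8],r14d | gif_driver.c:209 ?
abbrev gif_decode.chk15 : Word := 0x10af05  -- call __asan_store4_noabort; then mov DWORD PTR [rbx],0x2 | gif_driver.c:213 ?
abbrev gif_decode.chk16 : Word := 0x10af14  -- call __asan_load4_noabort; then mov r14d,DWORD PTR [rbp+0x60] | gif_driver.c:215 ?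
abbrev gif_decode.chk17 : Word := 0x10af21  -- call __asan_store4_noabort; then mov DWORD PTR [rbx+0xc],r14d | gif_driver.c:215 ?
abbrev gif_decode.chk18 : Word := 0x10af2e  -- call __asan_load4_noabort; then mov r14d,DWORD PTR [rbp+0x20] | gif_driver.c:216 ?
abbrev gif_decode.chk19 : Word := 0x10af3b  -- call __asan_store4_noabort; then mov DWORD PTR [rbx+0x18],r14d | gif_driver.c:216 ?
abbrev gif_decode.chk20 : Word := 0x10af47  -- call __asan_load4_noabort; then mov r14d,DWORD PTR [rbp+0x0] | gif_driver.c:217 ?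
abbrev gif_decode.chk21 : Word := 0x10af54  -- call __asan_store4_noabort; then mov DWORD PTR [rbx+0x1c],r14d | gif_driver.c:217 ?
abbrev gif_decode.chk22 : Word := 0x10af61  -- call __asan_load4_noabort; then mov r14d,DWORD PTR [rbp+0x4] | gif_driver.c:218 ?
abbrev gif_decode.chk23 : Word := 0x10af6e  -- call __asan_store4_noabort; then mov DWORD PTR [rbx+0x20],r14d | gif_driver.c:218 ?
abbrev gif_decode.chk24 : Word := 0x10af8a  -- call __asan_store8_noabort; then mov QWORD PTR [rbx+0x38],r14 | gif_driver.c:220 ?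
abbrev gif_decode.chk25 : Word := 0x10afae  -- call __asan_store4_noabort; then mov DWORD PTR [rbx+0x10],ebp | gif_driver.c:224 ?
abbrev gif_decode.chk26 : Word := 0x10afbe  -- call __asan_store4_noabort; then mov DWORD PTR [rbx+0x14],ebp | gif_driver.c:225 ?
abbrev gif_decode.chk27 : Word := 0x10afd2  -- call __asan_store8_noabort; then mov QWORD PTR [rbx+0x30],rbp | gif_driver.c:226 ?
abbrev gif_decode.chk28 : Word := 0x10b008  -- call __asan_store4_noabort; then mov DWORD PTR [rbx+0x4],ebp | gif_driver.c:204 ?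
abbrev gif_decode.chk29 : Word := 0x10b01c  -- call __asan_store8_noabort; then mov QWORD PTR [rbx+0x30],rbp | gif_driver.c:205 ?
abbrev gif_decode.chk30 : Word := 0x10b02a  -- call __asan_store4_noabort; then mov DWORD PTR [rbx],0x0 | gif_driver.c:211 ?

abbrev _sub_I_65535_1.entry : Word := 0x10b300  -- gif.c:14
abbrev _sub_I_65535_1.size : Nat := 24  -- bytes of code: 0x10b300 .. 0x10b318
abbrev _sub_I_65535_1.insns : Nat := 6  -- instructions
abbrev _sub_I_65535_1.ret1 : Word := 0x10b313  -- after the call at 0x10b30e of __asan_register_globals | gif.c:14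

end Gif.L

-- Sanity checks: a wrong generator fails the build here.
example : Gif.L.prog_main.entry = 0x105000 := by decide
example : Gif.L.DGifGetPrefixChar.loop1 = 0x105177 := by decide
example : Gif.L.prog_main.ret1 = 0x105057 := by decide
example : Gif.L.DGifGetPrefixChar.chk1 = 0x105198 := by decide
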